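-- pv_equiv track=rewrite | github.com/tlans21/Algorithm | 프로그래머스/LV.2/미로 탈출.py | solution
-- ===== SOURCE A (Python) =====
-- from collections import deque
--
-- dx = [-1, 1, 0, 0]
--
-- dy = [0, 0, -1, 1]
--
-- def bfs(x, y, maps, visited, flag):
--     if flag == 'lever':
--         exit = False
--     elif flag == 'exit':
--         exit = True
--
--     time = 0
--     queue = deque([(x, y, time)])
--     visited[x][y] = True
--
--     while queue:
--         pop_x, pop_y, pop_time = queue.popleft()
--
--         for i in range(4):
--             now_x = pop_x + dx[i]
--             now_y = pop_y + dy[i]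
--
--             if 0 <= now_x < len(maps) and 0 <= now_y < len(maps[now_x]):
--                 if not visited[now_x][now_y]:
--                     if maps[now_x][now_y] == 'O':
--                         queue.append((now_x, now_y, pop_time + 1))
--                         visited[now_x][now_y] = True
--                     elif maps[now_x][now_y] == 'L':
--                         # L을 거쳐서 E로 가는 경우
--
--                         if exit == True:
--                             queue.append((now_x, now_y, pop_time + 1))
--                             visited[now_x][now_y] = True
--                         else:
--                             return pop_time + 1
--                     elif maps[now_x][now_y] == 'E':
--                         # E를 거쳐서 L로 가는 경우
--                         if exit == False:
--                             queue.append((now_x, now_y, pop_time + 1))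
--                             visited[now_x][now_y] = True
--                         else:
--                             return pop_time + 1
--                     elif maps[now_x][now_y] == 'S':
--                         queue.append((now_x, now_y, pop_time + 1))
--                         visited[now_x][now_y] = True
--
--     return -1
--
-- def solution(maps):
--     answer = 0
--     visited = [[False for j in range(len(maps[i]))] for i in range(len(maps))]
--
--     # start -> lever
--     start_x = -1
--     start_y = -1
--
--     for i in range(len(maps)):
--         for j in range(len(maps[i])):
--             if maps[i][j] == 'S':
--                 start_x = i
--                 start_y = j
--
--     # bfs 탐색 시간
--     flag = 'lever'
--     first_time = bfs(start_x, start_y, maps, visited, flag)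
--     answer += first_time
--
--     if first_time == -1:
--         return -1
--
--
--     # lever -> exit
--     visited = [[False for j in range(len(maps[i]))] for i in range(len(maps))]
--     lever_x = -1
--     lever_y = -1
--
--     for i in range(len(maps)):
--         for j in range(len(maps[i])):
--             if maps[i][j] == 'L':
--                 lever_x = i
--                 lever_y = j
--     flag = 'exit'
--     second_time = bfs(lever_x, lever_y, maps, visited, flag)
--
--     if second_time == -1:
--         return -1
--
--     answer += second_time
--
--     return answer
-- ===== SOURCE B (Python) =====
-- def _escape_time(maps, start, target):
--     # Round-based fixed-point iteration over a discovery-round table (no queue):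
--     # round 0 knows only the start cell; round r adds every passable cell
--     # ('S','O','L','E') that borders an already known, non-target cell.  The
--     # answer is the earliest round that discovered a target cell.
--     dist = {start: 0}
--     total = sum(len(row) for row in maps)
--     for r in range(1, total + 2):
--         found = []
--         for i in range(len(maps)):
--             for j in range(len(maps[i])):
--                 if maps[i][j] in "SOLE" and (i, j) not in dist and any(
--                         0 <= ni < len(maps) and 0 <= nj < len(maps[ni])
--                         and (ni, nj) in dist and maps[ni][nj] != target
--                         for ni, nj in ((i - 1, j), (i + 1, j), (i, j - 1), (i, j + 1))):
--                     found.append((i, j))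
--         if not found:
--             break
--         for c in found:
--             dist[c] = r
--     hits = [d for (x, y), d in dist.items() if maps[x][y] == target]
--     return min(hits) if hits else None
--
--
-- def solution(maps):
--     spos = None
--     lpos = None
--     for i, row in enumerate(maps):
--         for j, c in enumerate(row):
--             if c == 'S':
--                 spos = (i, j)
--             if c == 'L':
--                 lpos = (i, j)
--     if spos is None or lpos is None:
--         return -1
--     t1 = _escape_time(maps, spos, 'L')
--     if t1 is None:
--         return -1
--     t2 = _escape_time(maps, lpos, 'E')
--     if t2 is None:
--         return -1
--     return t1 + t2
-- ===== Notes on version B (the rewrite author's own statement) =====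
-- stated objective: alternative
-- what changed: B drops A's deque/visited-matrix BFS with early return entirely: it computes, per phase, a discovery-round table by whole-grid fixed-point iteration (each round scans every grid cell and admits passable cells bordering an already known non-target cell), reads the answer as the minimum round recorded at a target cell, and finds S and L in one combined scan instead of A's two sentinel scans.
import Mathlib
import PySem

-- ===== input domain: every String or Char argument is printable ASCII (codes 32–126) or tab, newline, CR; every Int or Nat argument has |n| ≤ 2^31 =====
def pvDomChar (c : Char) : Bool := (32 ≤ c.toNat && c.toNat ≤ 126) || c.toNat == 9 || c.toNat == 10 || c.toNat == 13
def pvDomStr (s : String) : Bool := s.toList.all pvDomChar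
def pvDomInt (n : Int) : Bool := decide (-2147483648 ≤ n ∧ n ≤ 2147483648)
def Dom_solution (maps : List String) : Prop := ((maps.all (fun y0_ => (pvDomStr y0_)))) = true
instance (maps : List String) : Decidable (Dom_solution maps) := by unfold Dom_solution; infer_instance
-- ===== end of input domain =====

-- B replaces A's deque BFS (visited matrix, early return) by a whole-grid fixed-point
-- iteration over a discovery-round table read off at the target cells, and finds S and L
-- in one combined scan ('alternative': different algorithm, not claimed faster).

-- ===== PORT A =====
def pvDx : List Int := [-1, 1, 0, 0]
def pvDy : List Int := [0, 0, -1, 1]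

-- len(maps[i])  (read only under 0 ≤ i < len(maps), where it is exact)
def pvRowLen (maps : List String) (i : Int) : Int :=
  PySem.Str.len ((PySem.List.pyGet? maps i).getD "")

-- maps[i][j]  (read only under the in-bounds guard, where it is exact)
def pvAt (maps : List String) (i j : Int) : Char :=
  (PySem.Str.pyGet? ((PySem.List.pyGet? maps i).getD "") j).getD ' '

-- visited[i][j]  (read only under the in-bounds guard, where it is exact)
def pvVGet (v : List (List Bool)) (i j : Int) : Bool :=
  ((PySem.List.pyGet? ((PySem.List.pyGet? v i).getD []) j)).getD false

-- row[j] = True with Python index semantics (negative j counts from the end;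
-- an out-of-range write is an IndexError in Python — excluded by Pre_ — and a no-op here)
def pvSetRow (row : List Bool) (j : Int) : List Bool :=
  if 0 ≤ j ∧ j < (row.length : Int) then row.set j.toNat true
  else if -(row.length : Int) ≤ j ∧ j < 0 then row.set (j + row.length).toNat true
  else row

-- visited[i][j] = True (same Python index semantics on the row index)
def pvVSet (v : List (List Bool)) (i j : Int) : List (List Bool) :=
  if 0 ≤ i ∧ i < (v.length : Int) then v.modify i.toNat (fun r => pvSetRow r j)
  else if -(v.length : Int) ≤ i ∧ i < 0 then v.modify (i + v.length).toNat (fun r => pvSetRow r j)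
  else v

-- total number of grid cells (used only as loop fuel below)
def pvTotalLen (maps : List String) : Nat := (maps.map (fun s => s.toList.length)).sum

-- the 'for i in range(4)' neighbour scan of A's bfs, with A's early returns
def pvDirsA (maps : List String) (ex : Bool) (px py pt : Int) :
    List Int → List (Int × Int × Int) → List (List Bool) →
    Sum Int (List (Int × Int × Int) × List (List Bool))
  | [], q, v => Sum.inr (q, v)
  | i :: is, q, v =>
    let nx := px + (PySem.List.pyGet? pvDx i).getD 0
    let ny := py + (PySem.List.pyGet? pvDy i).getD 0
    if 0 ≤ nx ∧ nx < (maps.length : Int) ∧ 0 ≤ ny ∧ ny < pvRowLen maps nx then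
      if pvVGet v nx ny = false then
        if pvAt maps nx ny = 'O' then
          pvDirsA maps ex px py pt is (q ++ [(nx, ny, pt + 1)]) (pvVSet v nx ny)
        else if pvAt maps nx ny = 'L' then
          if ex then pvDirsA maps ex px py pt is (q ++ [(nx, ny, pt + 1)]) (pvVSet v nx ny)
          else Sum.inl (pt + 1)
        else if pvAt maps nx ny = 'E' then
          if ex then Sum.inl (pt + 1)
          else pvDirsA maps ex px py pt is (q ++ [(nx, ny, pt + 1)]) (pvVSet v nx ny)
        else if pvAt maps nx ny = 'S' then
          pvDirsA maps ex px py pt is (q ++ [(nx, ny, pt + 1)]) (pvVSet v nx ny)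
        else pvDirsA maps ex px py pt is q v
      else pvDirsA maps ex px py pt is q v
    else pvDirsA maps ex px py pt is q v

-- 'while queue:' of A's bfs.  Fuel: every enqueue marks a fresh cell, so the loop pops at most
-- cells+1 entries; 5*cells+5 over-approximates and the 0 case is never reached.
def pvBfsLoopA (maps : List String) (ex : Bool) :
    Nat → List (Int × Int × Int) → List (List Bool) → Int
  | 0, _, _ => -1
  | _ + 1, [], _ => -1
  | f + 1, (px, py, pt) :: rest, v =>
    match pvDirsA maps ex px py pt (PySem.List.pyRange 0 4 1) rest v with
    | Sum.inl r => r
    | Sum.inr (q, v') => pvBfsLoopA maps ex f q v'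

def pvBfsA (x y : Int) (maps : List String) (visited : List (List Bool)) (flag : String) : Int :=
  -- Python: if flag == 'lever': exit = False; elif flag == 'exit': exit = True (any other flag: NameError, never called)
  let ex := if flag = "lever" then false else if flag = "exit" then true else false
  pvBfsLoopA maps ex (5 * pvTotalLen maps + 5) [(x, y, 0)] (pvVSet visited x y)

-- A's double scan 'for i … for j …: if maps[i][j] == ch: (i, j)' with sentinel (-1, -1)
def pvScanA (maps : List String) (ch : Char) : Int × Int :=
  (PySem.List.enumerate maps 0).foldl (fun acc p =>
    (PySem.List.enumerate p.2.toList 0).foldl (fun acc2 q =>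
      if q.2 = ch then (p.1, q.1) else acc2) acc) (-1, -1)

def solution (maps : List String) : Int :=
  let visited := maps.map (fun s => s.toList.map (fun _ => false))
  let start := pvScanA maps 'S'
  let first := pvBfsA start.1 start.2 maps visited "lever"
  if first = -1 then -1
  else
    let visited2 := maps.map (fun s => s.toList.map (fun _ => false))
    let lever := pvScanA maps 'L'
    let second := pvBfsA lever.1 lever.2 maps visited2 "exit"
    if second = -1 then -1 else 0 + first + second

-- ===== PORT B =====
-- the four neighbour coordinates ((i-1,j),(i+1,j),(i,j-1),(i,j+1))
def pvNbrs (x y : Int) : List (Int × Int) := [(x - 1, y), (x + 1, y), (x, y - 1), (x, y + 1)]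

-- one round of B's fixed-point iteration: every passable unknown cell with a known
-- non-target neighbour ('found.append' under the combined condition, 'any' over 4 dirs)
def pvFound (maps : List String) (tgt : Char) (dist : PySem.Dict (Int × Int) Int) :
    List (Int × Int) :=
  (PySem.List.pyRange 0 (maps.length : Int) 1).foldl (fun acc i =>
    (PySem.List.pyRange 0 (pvRowLen maps i) 1).foldl (fun acc2 j =>
      if pvAt maps i j ∈ "SOLE".toList ∧ dist.contains (i, j) = false ∧
          ((pvNbrs i j).any (fun p => decide
            ((0 ≤ p.1 ∧ p.1 < (maps.length : Int) ∧ 0 ≤ p.2 ∧ p.2 < pvRowLen maps p.1)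
              ∧ dist.contains p = true ∧ pvAt maps p.1 p.2 ≠ tgt))) = true then
        acc2 ++ [(i, j)]
      else acc2) acc) []

-- 'for r in range(1, total + 2): … if not found: break; for c in found: dist[c] = r'
def pvJacobi (maps : List String) (tgt : Char) :
    Nat → Int → PySem.Dict (Int × Int) Int → PySem.Dict (Int × Int) Int
  | 0, _, dist => dist
  | f + 1, r, dist =>
    let found := pvFound maps tgt dist
    if found = [] then dist
    else pvJacobi maps tgt f (r + 1) (found.foldl (fun d c => d.insert c r) dist)

-- '[d for (x, y), d in dist.items() if maps[x][y] == target]'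
def pvHits (maps : List String) (tgt : Char) (dist : PySem.Dict (Int × Int) Int) : List Int :=
  (dist.items.filter (fun it => decide (pvAt maps it.1.1 it.1.2 = tgt))).map (fun it => it.2)

def pvEscape (maps : List String) (start : Int × Int) (tgt : Char) : Option Int :=
  let dist := pvJacobi maps tgt (pvTotalLen maps + 1) 1 (PySem.Dict.empty.insert start 0)
  PySem.List.min? (pvHits maps tgt dist) (fun v => v)

-- B's single scan keeping the last 'S' and the last 'L'
def pvScanB (maps : List String) : Option (Int × Int) × Option (Int × Int) :=
  (PySem.List.enumerate maps 0).foldl (fun acc p =>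
    (PySem.List.enumerate p.2.toList 0).foldl (fun acc2 q =>
      (if q.2 = 'S' then some (p.1, q.1) else acc2.1,
       if q.2 = 'L' then some (p.1, q.1) else acc2.2)) acc) (none, none)

def solution_alt (maps : List String) : Int :=
  let sc := pvScanB maps
  match sc.1, sc.2 with
  | some s, some l =>
    match pvEscape maps s 'L' with
    | none => -1
    | some t1 =>
      match pvEscape maps l 'E' with
      | none => -1
      | some t2 => t1 + t2
  | _, _ => -1

-- ===== PRECONDITION & SPEC =====
-- Pre_ excludes exactly the inputs on which A raises IndexError: grids with no 'S' whose row
-- list is empty or whose last row is empty (A then executes visited[-1][-1] on an empty row).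
def Pre_solution (maps : List String) : Prop :=
  (∃ s ∈ maps, 'S' ∈ s.toList) ∨ maps.getLast?.getD "" ≠ ""
instance (maps : List String) : Decidable (Pre_solution maps) := by unfold Pre_solution; infer_instance

def pvWitness_solution : List String := ["SL"]

def Spec_solution (maps : List String) (out : Int) : Prop := out = solution_alt maps
instance (maps : List String) (out : Int) : Decidable (Spec_solution maps out) := by unfold Spec_solution; infer_instance

-- ===== CLAIM (what is proved, stated in full; the proofs are below) =====
def Claim_equal_solution : Prop := ∀ (maps : List String), Dom_solution maps → Pre_solution maps → Spec_solution maps (solution maps)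

-- ===== LEMMAS AND PROOFS =====

-- proof-side abbreviations
def pvT (t : Int) : (Int × Int) → Int × Int × Int := fun c => (c.1, c.2, t)
def pvInB (maps : List String) (i j : Int) : Prop :=
  0 ≤ i ∧ i < (maps.length : Int) ∧ 0 ≤ j ∧ j < pvRowLen maps i
def pvRowLenN (maps : List String) (n : Nat) : Nat := (maps.getD n "").toList.length
def pvCells (maps : List String) : List (Int × Int) :=
  (List.range maps.length).flatMap (fun (i : Nat) =>
    (List.range (pvRowLenN maps i)).map (fun (j : Nat) => ((i : Int), (j : Int))))
def pvMkV (maps : List String) (S : PySem.Set (Int × Int)) : List (List Bool) :=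
  (List.range maps.length).map (fun (i : Nat) =>
    (List.range (pvRowLenN maps i)).map (fun (j : Nat) => S.contains ((i : Int), (j : Int))))
def pvCnt (maps : List String) (S : PySem.Set (Int × Int)) : Nat :=
  ((pvCells maps).filter (fun c => S.contains c)).length
def pvTgt (ex : Bool) : Char := if ex then 'E' else 'L'

-- the proof-side early-return frontier flood that links A's queue BFS to B's rounds
def pvDirsB (maps : List String) (tgt : Char) (x y : Int) :
    List (Int × Int) → List (Int × Int) → PySem.Set (Int × Int) →
    Sum Unit (List (Int × Int) × PySem.Set (Int × Int))
  | [], q, v => Sum.inr (q, v)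
  | d :: ds, q, v =>
    let nx := x + d.1
    let ny := y + d.2
    if (0 ≤ nx ∧ nx < (maps.length : Int) ∧ 0 ≤ ny ∧ ny < pvRowLen maps nx) ∧ (nx, ny) ∉ v then
      if pvAt maps nx ny = tgt then Sum.inl ()
      else if pvAt maps nx ny ∈ "SOLE".toList then
        pvDirsB maps tgt x y ds (q ++ [(nx, ny)]) (v.add (nx, ny))
      else pvDirsB maps tgt x y ds q v
    else pvDirsB maps tgt x y ds q v

def pvLevelB (maps : List String) (tgt : Char) :
    List (Int × Int) → List (Int × Int) → PySem.Set (Int × Int) →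
    Sum Unit (List (Int × Int) × PySem.Set (Int × Int))
  | [], nxt, vis => Sum.inr (nxt, vis)
  | c :: cs, nxt, vis =>
    match pvDirsB maps tgt c.1 c.2 [(-1, 0), (1, 0), (0, -1), (0, 1)] nxt vis with
    | Sum.inl _ => Sum.inl ()
    | Sum.inr r => pvLevelB maps tgt cs r.1 r.2

def pvFloodLoopB (maps : List String) (tgt : Char) :
    Nat → List (Int × Int) → Int → PySem.Set (Int × Int) → Int
  | 0, _, _, _ => -1
  | f + 1, cur, t, vis =>
    if cur = [] then -1
    else match pvLevelB maps tgt cur [] vis with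
      | Sum.inl _ => t + 1
      | Sum.inr r => pvFloodLoopB maps tgt f r.1 (t + 1) r.2

def pvFloodB (maps : List String) (start : Int × Int) (tgt : Char) : Int :=
  pvFloodLoopB maps tgt (pvTotalLen maps + 1) [start] 0 (PySem.Set.ofList [start])

-- '[(i, j) for i, row in enumerate(maps) for j, c in enumerate(row) if c == ch]'
def pvCand (maps : List String) (ch : Char) : List (Int × Int) :=
  (PySem.List.enumerate maps 0).flatMap (fun p =>
    ((PySem.List.enumerate p.2.toList 0).filter (fun q => decide (q.2 = ch))).map
      (fun q => (p.1, q.1)))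

def pvLastPos (maps : List String) (ch : Char) : Option (Int × Int) :=
  (pvCand maps ch).getLast?

lemma pvRowLen_eq (maps : List String) (i : Int) (h0 : 0 ≤ i) (h1 : i < (maps.length : Int)) :
    pvRowLen maps i = (pvRowLenN maps i.toNat : Int) := by
  unfold pvRowLen pvRowLenN
  rw [PySem.List.pyGet?_of_nonneg maps h0]
  have hlt : i.toNat < maps.length := by omega
  simp [List.getElem?_eq_getElem hlt, List.getD_eq_getElem?_getD, PySem.Str.len_eq]

lemma pvInB_iff (maps : List String) (i j : Int) :
    pvInB maps i j ↔ 0 ≤ i ∧ i < (maps.length : Int) ∧ 0 ≤ j ∧ j < (pvRowLenN maps i.toNat : Int) := by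
  unfold pvInB
  constructor
  · rintro ⟨h0, h1, h2, h3⟩
    rw [pvRowLen_eq maps i h0 h1] at h3
    exact ⟨h0, h1, h2, h3⟩
  · rintro ⟨h0, h1, h2, h3⟩
    rw [← pvRowLen_eq maps i h0 h1] at h3
    exact ⟨h0, h1, h2, h3⟩

lemma pvMem_cells (maps : List String) (p : Int × Int) :
    p ∈ pvCells maps ↔ pvInB maps p.1 p.2 := by
  obtain ⟨a, b⟩ := p
  dsimp only
  rw [pvCells, List.mem_flatMap]
  constructor
  · rintro ⟨i, hi, hmem⟩
    rw [List.mem_map] at hmem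
    obtain ⟨j, hj, heq⟩ := hmem
    rw [List.mem_range] at hi hj
    cases heq
    rw [pvInB_iff]
    refine ⟨?_, ?_, ?_, ?_⟩ <;> simp <;> omega
  · intro h
    rw [pvInB_iff] at h
    obtain ⟨h0, h1, h2, h3⟩ := h
    refine ⟨a.toNat, ?_, ?_⟩
    · rw [List.mem_range]; omega
    · rw [List.mem_map]
      refine ⟨b.toNat, ?_, ?_⟩
      · rw [List.mem_range]; omega
      · simp [Int.toNat_of_nonneg h0, Int.toNat_of_nonneg h2]

lemma pvNodup_cells (maps : List String) : (pvCells maps).Nodup := by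
  rw [pvCells, List.nodup_flatMap]
  constructor
  · intro i _
    have hinj : Function.Injective (fun (j : Nat) => ((i : Int), (j : Int))) := by
      intro x y hxy
      simpa using hxy
    exact List.Nodup.map hinj List.nodup_range
  · refine List.pairwise_lt_range.imp ?_
    intro a b hab x hx hx'
    simp only [List.mem_map, List.mem_range] at hx hx'
    obtain ⟨j, _, rfl⟩ := hx
    obtain ⟨j', _, he⟩ := hx'
    have : (b : Int) = (a : Int) := (Prod.mk.injEq .. ▸ he).1
    omega

lemma pvLen_cells (maps : List String) : (pvCells maps).length = pvTotalLen maps := by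
  rw [pvCells, List.length_flatMap, pvTotalLen]
  congr 1
  apply List.ext_getElem
  · simp
  · intro n h1 h2
    rw [List.length_map] at h2
    simp only [List.getElem_map, List.getElem_range, List.length_map, List.length_range]
    simp only [pvRowLenN, List.getD_eq_getElem?_getD]
    rw [List.getElem?_eq_getElem h2]
    rfl

lemma pvCnt_le (maps : List String) (S : PySem.Set (Int × Int)) :
    pvCnt maps S ≤ pvTotalLen maps := by
  calc pvCnt maps S ≤ (pvCells maps).length := List.length_filter_le _ _
  _ = pvTotalLen maps := pvLen_cells maps

lemma pvContains_add (S : PySem.Set (Int × Int)) (p : Int × Int) (c : Int × Int) :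
    (S.add p).contains c = (S.contains c || c == p) := by
  rw [PySem.Set.add_eq_ite]
  by_cases hp : p ∈ S
  · rw [if_pos hp]
    by_cases hc : c = p
    · subst hc
      simp [hp]
    · simp [beq_iff_eq, hc]
  · rw [if_neg hp]
    simp only [PySem.Set.contains_eq_listContains, List.contains_append, List.contains_cons]
    by_cases h : c = p <;> simp [h]

lemma pvFilter_add {α : Type} [BEq α] [LawfulBEq α] (q : α → Bool) (p : α) :
    ∀ (l : List α), l.Nodup → p ∈ l → q p = false →
    (l.filter (fun c => q c || c == p)).length = (l.filter q).length + 1 := by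
  intro l
  induction l with
  | nil => intro _ hp; cases hp
  | cons x l ih =>
    intro hl hp hq
    rcases List.mem_cons.mp hp with rfl | hpl
    · have hnotin : p ∉ l := (List.nodup_cons.mp hl).1
      have hcongr : l.filter (fun c => q c || c == p) = l.filter q := by
        apply List.filter_congr
        intro c hc
        have hne : (c == p) = false := by
          simp only [beq_eq_false_iff_ne, ne_eq]
          rintro rfl
          exact hnotin hc
        simp [hne]
      simp [hq, hcongr]
    · have hxp : (x == p) = false := by
        simp only [beq_eq_false_iff_ne, ne_eq]
        rintro rfl
        exact (List.nodup_cons.mp hl).1 hpl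
      have IH := ih (List.nodup_cons.mp hl).2 hpl hq
      cases hqx : q x <;> simp [hxp, hqx, IH]

lemma pvCnt_add (maps : List String) (S : PySem.Set (Int × Int)) (p : Int × Int)
    (hin : pvInB maps p.1 p.2) (hnp : p ∉ S) :
    pvCnt maps (S.add p) = pvCnt maps S + 1 := by
  unfold pvCnt
  have hfun : ∀ c ∈ pvCells maps, (S.contains c || c == p) = (S.add p).contains c := by
    intro c _
    exact (pvContains_add S p c).symm
  rw [← List.filter_congr hfun]
  refine pvFilter_add _ p (pvCells maps) (pvNodup_cells maps) ((pvMem_cells maps p).mpr hin) ?_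
  cases h : S.contains p
  · rfl
  · exact absurd ((PySem.Set.contains_iff _ _).mp h) hnp

lemma pvVGet_mkV (maps : List String) (S : PySem.Set (Int × Int)) (i j : Int)
    (hin : pvInB maps i j) : pvVGet (pvMkV maps S) i j = S.contains (i, j) := by
  obtain ⟨h0, h1, h2, h3⟩ := (pvInB_iff maps i j).mp hin
  have hi : i.toNat < maps.length := by omega
  have hj : j.toNat < pvRowLenN maps i.toNat := by omega
  unfold pvVGet pvMkV
  rw [PySem.List.pyGet?_of_nonneg _ h0, List.getElem?_map, List.getElem?_range hi]
  simp only [Option.map_some, Option.getD_some]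
  rw [PySem.List.pyGet?_of_nonneg _ h2, List.getElem?_map, List.getElem?_range hj]
  simp [Int.toNat_of_nonneg h0, Int.toNat_of_nonneg h2]

lemma pvVSet_mkV (maps : List String) (S : PySem.Set (Int × Int)) (i j : Int)
    (hin : pvInB maps i j) : pvVSet (pvMkV maps S) i j = pvMkV maps (S.add (i, j)) := by
  obtain ⟨h0, h1, h2, h3⟩ := (pvInB_iff maps i j).mp hin
  have hi : i.toNat < maps.length := by omega
  have hj : j.toNat < pvRowLenN maps i.toNat := by omega
  unfold pvVSet
  rw [if_pos (by simp [pvMkV]; omega)]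
  apply List.ext_getElem
  · simp [pvMkV, List.length_modify]
  · intro n hn1 hn2
    simp only [pvMkV, List.length_modify, List.length_map, List.length_range] at hn1 hn2
    rw [List.getElem_modify]
    simp only [pvMkV, List.getElem_map, List.getElem_range]
    by_cases hni : i.toNat = n
    · subst hni
      rw [if_pos rfl]
      unfold pvSetRow
      rw [if_pos (by simp [List.length_map, List.length_range]; omega)]
      apply List.ext_getElem
      · simp
      · intro m hm1 hm2
        simp only [List.length_set, List.length_map, List.length_range] at hm1 hm2
        rw [List.getElem_set]
        simp only [List.getElem_map, List.getElem_range]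
        rw [pvContains_add]
        by_cases hmj : j.toNat = m
        · subst hmj
          simp [Int.toNat_of_nonneg h0, Int.toNat_of_nonneg h2]
        · have hne0 : ¬ (((i.toNat : Int), (m : Int)) = (i, j)) := by
            simp only [Prod.ext_iff]
            rintro ⟨-, h⟩
            omega
          have hne : ((((i.toNat : Int)), (m : Int)) == (i, j)) = false := by
            simp only [beq_eq_false_iff_ne, ne_eq]
            exact hne0
          rw [if_neg hmj, hne, Bool.or_false]
    · rw [if_neg hni]
      apply List.map_congr_left
      intro m hm
      rw [pvContains_add]
      have hne0 : ¬ (((n : Int), (m : Int)) = (i, j)) := by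
        simp only [Prod.ext_iff]
        rintro ⟨h, -⟩
        omega
      have hne : ((((n : Int)), (m : Int)) == (i, j)) = false := by
        simp only [beq_eq_false_iff_ne, ne_eq]
        exact hne0
      simp [hne]

lemma pvMkV_empty (maps : List String) :
    maps.map (fun s => s.toList.map (fun _ => false)) = pvMkV maps PySem.Set.empty := by
  apply List.ext_getElem
  · simp [pvMkV]
  · intro n h1 h2
    rw [List.length_map] at h1
    simp only [pvMkV, List.getElem_map, List.getElem_range]
    have hr : pvRowLenN maps n = maps[n].toList.length := by
      simp only [pvRowLenN, List.getD_eq_getElem?_getD]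
      rw [List.getElem?_eq_getElem h1]
      simp
    rw [hr]
    apply List.ext_getElem
    · simp
    · intro m hm1 hm2
      simp [PySem.Set.empty, PySem.Set.contains_eq_listContains]

lemma pvBfsLoopA_nil (maps : List String) (ex : Bool) (f : Nat) (v : List (List Bool)) :
    pvBfsLoopA maps ex f [] v = -1 := by cases f <;> rfl

lemma pvFloodLoopB_nil (maps : List String) (tgt : Char) (f : Nat) (t : Int)
    (S : PySem.Set (Int × Int)) : pvFloodLoopB maps tgt f [] t S = -1 := by
  cases f <;> simp [pvFloodLoopB]

-- the two neighbour scans agree, step for step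
lemma pvDirs_corr (maps : List String) (ex : Bool) (x y t : Int) :
    ∀ (is : List Int) (ps : List (Int × Int)),
    List.Forall₂ (fun (i : Int) (p : Int × Int) =>
      (PySem.List.pyGet? pvDx i).getD 0 = p.1 ∧ (PySem.List.pyGet? pvDy i).getD 0 = p.2) is ps →
    ∀ (cs nxt : List (Int × Int)) (S : PySem.Set (Int × Int)),
    (match pvDirsB maps (pvTgt ex) x y ps nxt S with
     | Sum.inl _ =>
         pvDirsA maps ex x y t is (cs.map (pvT t) ++ nxt.map (pvT (t+1))) (pvMkV maps S)
           = Sum.inl (t + 1)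
     | Sum.inr r =>
         pvDirsA maps ex x y t is (cs.map (pvT t) ++ nxt.map (pvT (t+1))) (pvMkV maps S)
           = Sum.inr (cs.map (pvT t) ++ r.1.map (pvT (t+1)), pvMkV maps r.2)
         ∧ ∃ k, r.1.length = nxt.length + k ∧ pvCnt maps r.2 = pvCnt maps S + k) := by
  intro is ps hfa
  induction hfa with
  | nil =>
    intro cs nxt S
    change pvDirsA maps ex x y t [] (cs.map (pvT t) ++ nxt.map (pvT (t+1))) (pvMkV maps S)
        = Sum.inr (cs.map (pvT t) ++ nxt.map (pvT (t+1)), pvMkV maps S)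
      ∧ ∃ k, nxt.length = nxt.length + k ∧ pvCnt maps S = pvCnt maps S + k
    exact ⟨rfl, 0, rfl, rfl⟩
  | @cons i d is' ps' h1 h2 ih =>
    intro cs nxt S
    obtain ⟨hdx, hdy⟩ := h1
    simp only [pvDirsA, pvDirsB, hdx, hdy]
    by_cases hc : 0 ≤ x + d.1 ∧ x + d.1 < (maps.length : Int) ∧ 0 ≤ y + d.2 ∧
        y + d.2 < pvRowLen maps (x + d.1)
    · by_cases hv : (x + d.1, y + d.2) ∈ S
      · have hct : S.contains (x + d.1, y + d.2) = true := (PySem.Set.contains_iff _ _).mpr hv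
        rw [if_neg (c := (0 ≤ x + d.1 ∧ x + d.1 < (maps.length : Int) ∧ 0 ≤ y + d.2 ∧
            y + d.2 < pvRowLen maps (x + d.1)) ∧ (x + d.1, y + d.2) ∉ S)
            (by rintro ⟨-, hnv⟩; exact hnv hv)]
        rw [if_pos (c := 0 ≤ x + d.1 ∧ x + d.1 < (maps.length : Int) ∧ 0 ≤ y + d.2 ∧
            y + d.2 < pvRowLen maps (x + d.1)) hc]
        rw [pvVGet_mkV maps S _ _ hc, hct]
        rw [if_neg (c := (true = false)) (by simp)]
        exact ih cs nxt S
      · have hcf : S.contains (x + d.1, y + d.2) = false := by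
          cases h : S.contains (x + d.1, y + d.2)
          · rfl
          · exact absurd ((PySem.Set.contains_iff _ _).mp h) hv
        rw [if_pos (c := (0 ≤ x + d.1 ∧ x + d.1 < (maps.length : Int) ∧ 0 ≤ y + d.2 ∧
            y + d.2 < pvRowLen maps (x + d.1)) ∧ (x + d.1, y + d.2) ∉ S) ⟨hc, hv⟩]
        rw [if_pos (c := 0 ≤ x + d.1 ∧ x + d.1 < (maps.length : Int) ∧ 0 ≤ y + d.2 ∧
            y + d.2 < pvRowLen maps (x + d.1)) hc]
        rw [pvVGet_mkV maps S _ _ hc, hcf]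
        rw [if_pos (c := (false = false)) rfl]
        have henq :
            (match pvDirsB maps (pvTgt ex) x y ps' (nxt ++ [(x + d.1, y + d.2)])
                (S.add (x + d.1, y + d.2)) with
             | Sum.inl _ =>
                 pvDirsA maps ex x y t is'
                   ((cs.map (pvT t) ++ nxt.map (pvT (t + 1))) ++ [(x + d.1, y + d.2, t + 1)])
                   (pvVSet (pvMkV maps S) (x + d.1) (y + d.2)) = Sum.inl (t + 1)
             | Sum.inr r =>
                 pvDirsA maps ex x y t is'
                   ((cs.map (pvT t) ++ nxt.map (pvT (t + 1))) ++ [(x + d.1, y + d.2, t + 1)])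
                   (pvVSet (pvMkV maps S) (x + d.1) (y + d.2))
                   = Sum.inr (cs.map (pvT t) ++ r.1.map (pvT (t + 1)), pvMkV maps r.2)
                 ∧ ∃ k, r.1.length = nxt.length + k ∧ pvCnt maps r.2 = pvCnt maps S + k) := by
          have H := ih cs (nxt ++ [(x + d.1, y + d.2)]) (S.add (x + d.1, y + d.2))
          rw [pvVSet_mkV maps S _ _ hc]
          have harg : (cs.map (pvT t) ++ nxt.map (pvT (t + 1))) ++ [(x + d.1, y + d.2, t + 1)]
              = cs.map (pvT t) ++ (nxt ++ [(x + d.1, y + d.2)]).map (pvT (t + 1)) := by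
            simp [pvT, List.map_append]
          rw [harg]
          cases hB : pvDirsB maps (pvTgt ex) x y ps' (nxt ++ [(x + d.1, y + d.2)])
              (S.add (x + d.1, y + d.2)) with
          | inl u => rw [hB] at H; exact H
          | inr r =>
            rw [hB] at H
            obtain ⟨heq, k, hk1, hk2⟩ := H
            refine ⟨heq, k + 1, ?_, ?_⟩
            · simp only [List.length_append, List.length_cons, List.length_nil] at hk1
              omega
            · rw [hk2, pvCnt_add maps S (x + d.1, y + d.2) hc hv]
              omega
        by_cases hO : pvAt maps (x + d.1) (y + d.2) = 'O'
        · rw [if_neg (c := (pvAt maps (x + d.1) (y + d.2) = pvTgt ex))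
            (by rw [hO]; cases ex <;> decide)]
          rw [if_pos (c := (pvAt maps (x + d.1) (y + d.2) ∈ "SOLE".toList)) (by rw [hO]; decide)]
          rw [if_pos (c := (pvAt maps (x + d.1) (y + d.2) = 'O')) hO]
          exact henq
        · rw [if_neg (c := (pvAt maps (x + d.1) (y + d.2) = 'O')) hO]
          by_cases hL : pvAt maps (x + d.1) (y + d.2) = 'L'
          · rw [if_pos (c := (pvAt maps (x + d.1) (y + d.2) = 'L')) hL]
            cases ex with
            | true =>
              rw [if_neg (c := (pvAt maps (x + d.1) (y + d.2) = pvTgt true)) (by rw [hL]; decide)]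
              rw [if_pos (c := (pvAt maps (x + d.1) (y + d.2) ∈ "SOLE".toList)) (by rw [hL]; decide)]
              rw [if_pos (c := (true = true)) rfl]
              exact henq
            | false =>
              rw [if_pos (c := (pvAt maps (x + d.1) (y + d.2) = pvTgt false)) (by rw [hL]; rfl)]
              rw [if_neg (c := (false = true)) (by simp)]
          · rw [if_neg (c := (pvAt maps (x + d.1) (y + d.2) = 'L')) hL]
            by_cases hE : pvAt maps (x + d.1) (y + d.2) = 'E'
            · rw [if_pos (c := (pvAt maps (x + d.1) (y + d.2) = 'E')) hE]
              cases ex with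
              | true =>
                rw [if_pos (c := (pvAt maps (x + d.1) (y + d.2) = pvTgt true)) (by rw [hE]; rfl)]
                rw [if_pos (c := (true = true)) rfl]
              | false =>
                rw [if_neg (c := (pvAt maps (x + d.1) (y + d.2) = pvTgt false)) (by rw [hE]; decide)]
                rw [if_pos (c := (pvAt maps (x + d.1) (y + d.2) ∈ "SOLE".toList)) (by rw [hE]; decide)]
                rw [if_neg (c := (false = true)) (by simp)]
                exact henq
            · rw [if_neg (c := (pvAt maps (x + d.1) (y + d.2) = 'E')) hE]
              by_cases hS : pvAt maps (x + d.1) (y + d.2) = 'S'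
              · rw [if_neg (c := (pvAt maps (x + d.1) (y + d.2) = pvTgt ex))
                  (by rw [hS]; cases ex <;> decide)]
                rw [if_pos (c := (pvAt maps (x + d.1) (y + d.2) ∈ "SOLE".toList)) (by rw [hS]; decide)]
                rw [if_pos (c := (pvAt maps (x + d.1) (y + d.2) = 'S')) hS]
                exact henq
              · have hnt : ¬ pvAt maps (x + d.1) (y + d.2) = pvTgt ex := by
                  cases ex
                  · exact hL
                  · exact hE
                have hns : pvAt maps (x + d.1) (y + d.2) ∉ "SOLE".toList := by
                  intro hmem
                  rcases (by simpa using hmem :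
                      pvAt maps (x + d.1) (y + d.2) = 'S' ∨ pvAt maps (x + d.1) (y + d.2) = 'O' ∨
                      pvAt maps (x + d.1) (y + d.2) = 'L' ∨ pvAt maps (x + d.1) (y + d.2) = 'E')
                    with h | h | h | h
                  · exact hS h
                  · exact hO h
                  · exact hL h
                  · exact hE h
                rw [if_neg (c := (pvAt maps (x + d.1) (y + d.2) = 'S')) hS]
                rw [if_neg (c := (pvAt maps (x + d.1) (y + d.2) = pvTgt ex)) hnt]
                rw [if_neg (c := (pvAt maps (x + d.1) (y + d.2) ∈ "SOLE".toList)) hns]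
                exact ih cs nxt S
    · rw [if_neg (c := (0 ≤ x + d.1 ∧ x + d.1 < (maps.length : Int) ∧ 0 ≤ y + d.2 ∧
          y + d.2 < pvRowLen maps (x + d.1)) ∧ (x + d.1, y + d.2) ∉ S) (fun h => hc h.1)]
      rw [if_neg (c := 0 ≤ x + d.1 ∧ x + d.1 < (maps.length : Int) ∧ 0 ≤ y + d.2 ∧
          y + d.2 < pvRowLen maps (x + d.1)) hc]
      exact ih cs nxt S

-- one whole level, then the rest of the flood
lemma pvInner (maps : List String) (ex : Bool) (fB' : Nat)
    (IH : ∀ (cur : List (Int × Int)) (t : Int) (S : PySem.Set (Int × Int)) (fA : Nat),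
      fA ≥ 5 * ((pvCells maps).length - pvCnt maps S) + cur.length →
      fB' ≥ ((pvCells maps).length - pvCnt maps S) + 1 →
      pvBfsLoopA maps ex fA (cur.map (pvT t)) (pvMkV maps S)
        = pvFloodLoopB maps (pvTgt ex) fB' cur t S) :
    ∀ (cs nxt : List (Int × Int)) (S : PySem.Set (Int × Int)) (fA : Nat) (t : Int),
    fA ≥ 5 * ((pvCells maps).length - pvCnt maps S) + cs.length + nxt.length →
    fB' + 1 ≥ ((pvCells maps).length - pvCnt maps S) + nxt.length + 1 →
    pvBfsLoopA maps ex fA (cs.map (pvT t) ++ nxt.map (pvT (t+1))) (pvMkV maps S)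
      = match pvLevelB maps (pvTgt ex) cs nxt S with
        | Sum.inl _ => t + 1
        | Sum.inr r => pvFloodLoopB maps (pvTgt ex) fB' r.1 (t + 1) r.2 := by
  intro cs
  induction cs with
  | nil =>
    intro nxt S fA t hA hB
    simp only [pvLevelB, List.map_nil, List.nil_append]
    cases nxt with
    | nil =>
      simp only [List.map_nil]
      rw [pvBfsLoopA_nil, pvFloodLoopB_nil]
    | cons c cs' =>
      exact IH (c :: cs') (t + 1) S fA (by simpa using hA) (by
        have hlen : (c :: cs').length = cs'.length + 1 := by simp
        omega)
  | cons c cs' ih =>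
    intro nxt S fA t hA hB
    obtain ⟨fA', rfl⟩ : ∃ f, fA = f + 1 := ⟨fA - 1, by
      have hlen : (c :: cs').length = cs'.length + 1 := by simp
      omega⟩
    have hrange : PySem.List.pyRange 0 4 1 = [0, 1, 2, 3] := by decide
    have hfa : List.Forall₂ (fun (i : Int) (p : Int × Int) =>
        (PySem.List.pyGet? pvDx i).getD 0 = p.1 ∧ (PySem.List.pyGet? pvDy i).getD 0 = p.2)
        (PySem.List.pyRange 0 4 1) [(-1, 0), (1, 0), (0, -1), (0, 1)] := by
      rw [hrange]
      exact .cons (by decide) (.cons (by decide) (.cons (by decide) (.cons (by decide) .nil)))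
    have hcorr := pvDirs_corr maps ex c.1 c.2 t (PySem.List.pyRange 0 4 1)
        [(-1, 0), (1, 0), (0, -1), (0, 1)] hfa cs' nxt S
    have hstep : pvBfsLoopA maps ex (fA' + 1)
        ((c :: cs').map (pvT t) ++ nxt.map (pvT (t + 1))) (pvMkV maps S)
        = match pvDirsA maps ex c.1 c.2 t (PySem.List.pyRange 0 4 1)
            (cs'.map (pvT t) ++ nxt.map (pvT (t + 1))) (pvMkV maps S) with
          | Sum.inl r => r
          | Sum.inr (q, v') => pvBfsLoopA maps ex fA' q v' := rfl
    rw [hstep]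
    simp only [pvLevelB]
    have hle : pvCnt maps S ≤ (pvCells maps).length := by
      rw [pvLen_cells]
      exact pvCnt_le maps S
    cases hB' : pvDirsB maps (pvTgt ex) c.1 c.2 [(-1, 0), (1, 0), (0, -1), (0, 1)] nxt S with
    | inl u =>
      rw [hB'] at hcorr
      rw [hcorr]
    | inr r =>
      rw [hB'] at hcorr
      obtain ⟨heq, k, hk1, hk2⟩ := hcorr
      rw [heq]
      have hle2 : pvCnt maps r.2 ≤ (pvCells maps).length := by
        rw [pvLen_cells]
        exact pvCnt_le maps r.2
      exact ih r.1 r.2 fA' t (by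
          simp only [List.length_cons] at hA
          omega) (by omega)

lemma pvMain (maps : List String) (ex : Bool) :
    ∀ (fB : Nat) (cur : List (Int × Int)) (t : Int) (S : PySem.Set (Int × Int)) (fA : Nat),
    fA ≥ 5 * ((pvCells maps).length - pvCnt maps S) + cur.length →
    fB ≥ ((pvCells maps).length - pvCnt maps S) + 1 →
    pvBfsLoopA maps ex fA (cur.map (pvT t)) (pvMkV maps S)
      = pvFloodLoopB maps (pvTgt ex) fB cur t S := by
  intro fB
  induction fB with
  | zero =>
    intro cur t S fA hA hB
    exact absurd hB (by omega)
  | succ fB' ih =>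
    intro cur t S fA hA hB
    simp only [pvFloodLoopB]
    cases cur with
    | nil =>
      rw [if_pos rfl]
      simpa using pvBfsLoopA_nil maps ex fA (pvMkV maps S)
    | cons c cs =>
      rw [if_neg (by simp)]
      have h := pvInner maps ex fB' ih (c :: cs) [] S fA t
        (by simpa using hA) (by simpa using hB)
      simpa using h

-- the two bfs calls agree from any in-bounds start
lemma pvPhase (maps : List String) (ex : Bool) (p : Int × Int) (hin : pvInB maps p.1 p.2)
    (flag : String) (hflag : (if flag = "lever" then false else if flag = "exit" then true else false) = ex) :
    pvBfsA p.1 p.2 maps (maps.map (fun s => s.toList.map (fun _ => false))) flag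
      = pvFloodB maps p (pvTgt ex) := by
  rw [pvBfsA, pvFloodB]
  simp only [hflag]
  rw [pvMkV_empty maps, pvVSet_mkV maps PySem.Set.empty p.1 p.2 hin]
  have hS0 : PySem.Set.add PySem.Set.empty (p.1, p.2) = PySem.Set.ofList [p] := by
    cases p
    rfl
  rw [hS0]
  have hC : (pvCells maps).length = pvTotalLen maps := pvLen_cells maps
  have hle : pvCnt maps (PySem.Set.ofList [p]) ≤ (pvCells maps).length := by
    rw [hC]
    exact pvCnt_le maps _
  have h := pvMain maps ex (pvTotalLen maps + 1) [p] 0 (PySem.Set.ofList [p])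
      (5 * pvTotalLen maps + 5) (by simp only [List.length_cons, List.length_nil]; omega)
      (by omega)
  simpa [pvT] using h

lemma pvAt_eq (maps : List String) (i j : Int) (hin : pvInB maps i j) :
    pvAt maps i j = (maps.getD i.toNat "").toList.getD j.toNat ' ' := by
  obtain ⟨h0, h1, h2, h3⟩ := (pvInB_iff maps i j).mp hin
  have hi : i.toNat < maps.length := by omega
  have hrow : maps.getD i.toNat "" = maps[i.toNat] := by
    simp [List.getD_eq_getElem?_getD, List.getElem?_eq_getElem hi]
  have hj : j.toNat < maps[i.toNat].toList.length := by
    have : pvRowLenN maps i.toNat = maps[i.toNat].toList.length := by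
      rw [pvRowLenN, hrow]
    omega
  rw [hrow]
  unfold pvAt
  rw [PySem.List.pyGet?_of_nonneg _ h0, List.getElem?_eq_getElem hi]
  simp only [Option.getD_some]
  rw [show j = ((j.toNat : Nat) : Int) by omega, PySem.Str.pyGet?_natCast]
  simp only [List.getD_eq_getElem?_getD, Int.toNat_natCast]

lemma pvFoldl_last {β : Type} : ∀ (l : List β) (acc : β),
    l.foldl (fun _ y => y) acc = (l.getLast?).getD acc
  | [], _ => rfl
  | x :: l, acc => by
    rw [List.foldl_cons, pvFoldl_last l x]
    cases l with
    | nil => rfl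
    | cons z zs =>
      obtain ⟨w, hw⟩ : ∃ w, (z :: zs).getLast? = some w := by
        cases h : (z :: zs).getLast? with
        | none => exact absurd (List.getLast?_eq_none_iff.mp h) (by simp)
        | some w => exact ⟨w, rfl⟩
      rw [show (x :: z :: zs).getLast? = (z :: zs).getLast? from List.getLast?_cons_cons, hw]
      rfl

lemma pvFoldl_choose {α β : Type} (p : α → Prop) [DecidablePred p] (f : α → β) :
    ∀ (l : List α) (acc : β),
    l.foldl (fun a x => if p x then f x else a) acc
      = ((l.filter (fun x => decide (p x))).map f).foldl (fun _ y => y) acc := by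
  intro l
  induction l with
  | nil => intro _; rfl
  | cons x l ih =>
    intro acc
    by_cases hx : p x <;> simp [hx, ih]

-- scan/cand correspondence
lemma pvMem_cand (maps : List String) (ch : Char) (p : Int × Int) :
    p ∈ pvCand maps ch ↔ pvInB maps p.1 p.2 ∧ pvAt maps p.1 p.2 = ch := by
  constructor
  · intro hp
    rw [pvCand, List.mem_flatMap] at hp
    obtain ⟨r, hr, hmem⟩ := hp
    rw [PySem.List.enumerate_eq_map_pyRange maps "", List.mem_map] at hr
    obtain ⟨ii, hii, rfl⟩ := hr
    rw [PySem.List.mem_pyRange_one] at hii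
    rw [PySem.List.len_eq] at hii
    rw [List.mem_map] at hmem
    obtain ⟨q, hq, rfl⟩ := hmem
    rw [List.mem_filter] at hq
    obtain ⟨hq1, hq2⟩ := hq
    rw [PySem.List.enumerate_eq_map_pyRange _ ' ', List.mem_map] at hq1
    obtain ⟨jj, hjj, rfl⟩ := hq1
    rw [PySem.List.mem_pyRange_one] at hjj
    dsimp only at hjj hq2 ⊢
    rw [PySem.List.len_eq] at hjj
    simp only [decide_eq_true_eq] at hq2
    have hrowd : PySem.List.pyGetD maps ii "" = maps[ii.toNat] :=
      PySem.List.pyGetD_eq_getElem maps "" hii.1 hii.2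
    have hrowlen : pvRowLenN maps ii.toNat = maps[ii.toNat].toList.length := by
      rw [pvRowLenN]
      simp [List.getD_eq_getElem?_getD, List.getElem?_eq_getElem (by omega : ii.toNat < maps.length)]
    rw [hrowd] at hjj
    have hinb : pvInB maps ii jj := by
      rw [pvInB_iff]
      refine ⟨hii.1, hii.2, hjj.1, ?_⟩
      rw [hrowlen]
      exact hjj.2
    refine ⟨hinb, ?_⟩
    rw [pvAt_eq maps ii jj hinb]
    have hjn : jj.toNat < maps[ii.toNat].toList.length := by
      have := hjj.2
      omega
    rw [← hq2]
    simp only [hrowd]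
    rw [PySem.List.pyGetD_eq_getElem _ ' ' hjj.1 hjj.2]
    simp only [List.getD_eq_getElem?_getD]
    rw [List.getElem?_eq_getElem (by omega : ii.toNat < maps.length)]
    simp only [Option.getD_some]
    rw [List.getElem?_eq_getElem hjn]
    simp
  · intro h
    obtain ⟨hin, hat⟩ := h
    obtain ⟨h0, h1, h2, h3⟩ := (pvInB_iff maps p.1 p.2).mp hin
    rw [pvCand, List.mem_flatMap]
    refine ⟨(p.1, PySem.List.pyGetD maps p.1 ""), ?_, ?_⟩
    · rw [PySem.List.enumerate_eq_map_pyRange maps "", List.mem_map]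
      exact ⟨p.1, by rw [PySem.List.mem_pyRange_one, PySem.List.len_eq]; exact ⟨h0, h1⟩, rfl⟩
    · rw [List.mem_map]
      have hrowd : PySem.List.pyGetD maps p.1 "" = maps[p.1.toNat] :=
        PySem.List.pyGetD_eq_getElem maps "" h0 h1
      have hrowlen : pvRowLenN maps p.1.toNat = maps[p.1.toNat].toList.length := by
        rw [pvRowLenN]
        simp [List.getD_eq_getElem?_getD, List.getElem?_eq_getElem (by omega : p.1.toNat < maps.length)]
      have hj2 : p.2 < ((PySem.List.pyGetD maps p.1 "").toList.length : Int) := by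
        rw [hrowd]
        omega
      refine ⟨(p.2, PySem.List.pyGetD (PySem.List.pyGetD maps p.1 "").toList p.2 ' '), ?_, ?_⟩
      · rw [List.mem_filter]
        constructor
        · rw [PySem.List.enumerate_eq_map_pyRange _ ' ', List.mem_map]
          exact ⟨p.2, by rw [PySem.List.mem_pyRange_one, PySem.List.len_eq]; exact ⟨h2, hj2⟩, rfl⟩
        · simp only [decide_eq_true_eq]
          rw [PySem.List.pyGetD_eq_getElem _ ' ' h2 hj2]
          rw [← hat, pvAt_eq maps p.1 p.2 hin]
          simp only [hrowd]
          have hjn : p.2.toNat < maps[p.1.toNat].toList.length := by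
            rw [← hrowlen]; omega
          rw [show maps.getD p.1.toNat "" = maps[p.1.toNat] from by
            simp [List.getD_eq_getElem?_getD, List.getElem?_eq_getElem (by omega : p.1.toNat < maps.length)]]
          simp only [List.getD_eq_getElem?_getD]
          rw [List.getElem?_eq_getElem hjn]
          simp
      · simp

lemma pvScanA_eq (maps : List String) (ch : Char) :
    pvScanA maps ch = (pvLastPos maps ch).getD (-1, -1) := by
  rw [pvLastPos, ← pvFoldl_last, pvCand, List.foldl_flatMap, pvScanA]
  congr 1
  funext acc pr
  exact pvFoldl_choose (fun (q : Int × Char) => q.2 = ch) (fun (q : Int × Char) => (pr.1, q.1)) _ acc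

lemma pvLastPos_some (maps : List String) (ch : Char) (p : Int × Int)
    (h : pvLastPos maps ch = some p) : pvInB maps p.1 p.2 ∧ pvAt maps p.1 p.2 = ch :=
  (pvMem_cand maps ch p).mp (List.mem_of_getLast? h)

lemma pvLastPos_none (maps : List String) (ch : Char) (h : pvLastPos maps ch = none) :
    ∀ i j, pvInB maps i j → pvAt maps i j ≠ ch := by
  intro i j hin hat
  have hm : (i, j) ∈ pvCand maps ch := (pvMem_cand maps ch (i, j)).mpr ⟨hin, hat⟩
  rw [pvLastPos, List.getLast?_eq_none_iff] at h
  rw [h] at hm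
  exact absurd hm (List.not_mem_nil)

-- when the target char is nowhere in the grid the flood returns -1
lemma pvFlood_no_target (maps : List String) (tgt : Char)
    (habs : ∀ i j, pvInB maps i j → pvAt maps i j ≠ tgt) :
    ∀ (f : Nat) (cur : List (Int × Int)) (t : Int) (S : PySem.Set (Int × Int)),
    pvFloodLoopB maps tgt f cur t S = -1 := by
  have hdirs : ∀ (x y : Int) (ds nxt : List (Int × Int)) (S : PySem.Set (Int × Int)),
      ∃ r, pvDirsB maps tgt x y ds nxt S = Sum.inr r := by
    intro x y ds
    induction ds with
    | nil => intro nxt S; exact ⟨(nxt, S), rfl⟩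
    | cons d ds ih =>
      intro nxt S
      simp only [pvDirsB]
      by_cases hc : (0 ≤ x + d.1 ∧ x + d.1 < (maps.length : Int) ∧ 0 ≤ y + d.2 ∧
          y + d.2 < pvRowLen maps (x + d.1)) ∧ (x + d.1, y + d.2) ∉ S
      · rw [if_pos hc, if_neg (habs _ _ hc.1)]
        by_cases hs : pvAt maps (x + d.1) (y + d.2) ∈ "SOLE".toList
        · rw [if_pos hs]; exact ih _ _
        · rw [if_neg hs]; exact ih _ _
      · rw [if_neg hc]; exact ih _ _
  have hlevel : ∀ (cs nxt : List (Int × Int)) (S : PySem.Set (Int × Int)),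
      ∃ r, pvLevelB maps tgt cs nxt S = Sum.inr r := by
    intro cs
    induction cs with
    | nil => intro nxt S; exact ⟨(nxt, S), rfl⟩
    | cons c cs ih =>
      intro nxt S
      obtain ⟨r, hr⟩ := hdirs c.1 c.2 [(-1, 0), (1, 0), (0, -1), (0, 1)] nxt S
      simp only [pvLevelB, hr]
      exact ih _ _
  intro f
  induction f with
  | zero => intro cur t S; rfl
  | succ f ih =>
    intro cur t S
    simp only [pvFloodLoopB]
    by_cases hc : cur = []
    · rw [if_pos hc]
    · rw [if_neg hc]
      obtain ⟨r, hr⟩ := hlevel cur [] S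
      rw [hr]
      exact ih _ _ _

-- A's bfs from the sentinel (-1, -1) finds nothing
lemma pvBfsA_sentinel (maps : List String) (v : List (List Bool)) :
    pvBfsA (-1) (-1) maps v "lever" = -1 := by
  rw [pvBfsA]
  simp only [if_pos trivial]
  have d0 : (PySem.List.pyGet? pvDx (0 : Int)).getD 0 = -1 := by decide
  have d1 : (PySem.List.pyGet? pvDx (1 : Int)).getD 0 = 1 := by decide
  have d2 : (PySem.List.pyGet? pvDx (2 : Int)).getD 0 = 0 := by decide
  have d3 : (PySem.List.pyGet? pvDx (3 : Int)).getD 0 = 0 := by decide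
  have e0 : (PySem.List.pyGet? pvDy (0 : Int)).getD 0 = 0 := by decide
  have e1 : (PySem.List.pyGet? pvDy (1 : Int)).getD 0 = 0 := by decide
  have e2 : (PySem.List.pyGet? pvDy (2 : Int)).getD 0 = -1 := by decide
  have e3 : (PySem.List.pyGet? pvDy (3 : Int)).getD 0 = 1 := by decide
  have hrange : PySem.List.pyRange 0 4 1 = [0, 1, 2, 3] := by decide
  have hd : pvDirsA maps false (-1) (-1) 0 [0, 1, 2, 3] [] (pvVSet v (-1) (-1))
      = Sum.inr ([], pvVSet v (-1) (-1)) := by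
    simp only [pvDirsA, d0, d1, d2, d3, e0, e1, e2, e3]
    rw [if_neg (by rintro ⟨h, -⟩; omega), if_neg (by rintro ⟨-, -, h, -⟩; omega),
      if_neg (by rintro ⟨h, -⟩; omega), if_neg (by rintro ⟨h, -⟩; omega)]
  rw [show (5 * pvTotalLen maps + 5) = (5 * pvTotalLen maps + 4) + 1 from rfl]
  simp only [pvBfsLoopA, hrange, hd]

-- ===================================================================================
-- NEW B-SIDE MACHINERY: flood levels = Jacobi rounds
-- ===================================================================================

lemma pvNbrs_iff (x y a b : Int) :
    (a, b) ∈ pvNbrs x y ↔ ∃ d ∈ ([(-1, 0), (1, 0), (0, -1), (0, 1)] : List (Int × Int)),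
      (a, b) = (x + d.1, y + d.2) := by
  simp only [pvNbrs, List.mem_cons, List.not_mem_nil, or_false, Prod.ext_iff]
  constructor
  · rintro (⟨h1,h2⟩|⟨h1,h2⟩|⟨h1,h2⟩|⟨h1,h2⟩)
    · exact ⟨(-1,0), by simp, by constructor <;> simp <;> omega⟩
    · exact ⟨(1,0), by simp, by constructor <;> simp <;> omega⟩
    · exact ⟨(0,-1), by simp, by constructor <;> simp <;> omega⟩
    · exact ⟨(0,1), by simp, by constructor <;> simp <;> omega⟩
  · rintro ⟨d, hd, h1, h2⟩
    rcases hd with ⟨e1,e2⟩|⟨e1,e2⟩|⟨e1,e2⟩|⟨e1,e2⟩ <;> omega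

lemma pvNbrs_symm (x y a b : Int) : (a, b) ∈ pvNbrs x y ↔ (x, y) ∈ pvNbrs a b := by
  simp [pvNbrs, Prod.ext_iff]
  omega

lemma pvNbrs_symm' (p q : Int × Int) : p ∈ pvNbrs q.1 q.2 ↔ q ∈ pvNbrs p.1 p.2 := by
  obtain ⟨a, b⟩ := p
  obtain ⟨x, y⟩ := q
  exact pvNbrs_symm x y a b

-- one round's 'found' list as a filter of the cell grid
lemma pvFound_eq_flat (maps : List String) (tgt : Char) (dist : PySem.Dict (Int × Int) Int) :
    pvFound maps tgt dist
      = (PySem.List.pyRange 0 (maps.length : Int) 1).flatMap (fun i =>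
          ((PySem.List.pyRange 0 (pvRowLen maps i) 1).filter (fun j => decide
            (pvAt maps i j ∈ "SOLE".toList ∧ dist.contains (i, j) = false ∧
             ((pvNbrs i j).any (fun p => decide
               ((0 ≤ p.1 ∧ p.1 < (maps.length : Int) ∧ 0 ≤ p.2 ∧ p.2 < pvRowLen maps p.1)
                 ∧ dist.contains p = true ∧ pvAt maps p.1 p.2 ≠ tgt))) = true))).map
            (fun j => (i, j))) := by
  unfold pvFound
  rw [PySem.List.foldl_congr_mem _ _
    (fun acc i => acc ++ ((PySem.List.pyRange 0 (pvRowLen maps i) 1).filter (fun j => decide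
            (pvAt maps i j ∈ "SOLE".toList ∧ dist.contains (i, j) = false ∧
             ((pvNbrs i j).any (fun p => decide
               ((0 ≤ p.1 ∧ p.1 < (maps.length : Int) ∧ 0 ≤ p.2 ∧ p.2 < pvRowLen maps p.1)
                 ∧ dist.contains p = true ∧ pvAt maps p.1 p.2 ≠ tgt))) = true))).map
            (fun j => (i, j))) []
    (fun acc i _ => PySem.List.foldl_append_ite _ _ _ acc)]
  rw [PySem.List.foldl_append_eq_flatMap]
  simp

-- membership in one round's 'found' list
lemma pvMem_found (maps : List String) (tgt : Char) (dist : PySem.Dict (Int × Int) Int)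
    (c : Int × Int) :
    c ∈ pvFound maps tgt dist ↔
      pvInB maps c.1 c.2 ∧ pvAt maps c.1 c.2 ∈ "SOLE".toList ∧ dist.contains c = false ∧
      ∃ p ∈ pvNbrs c.1 c.2, pvInB maps p.1 p.2 ∧ dist.contains p = true ∧
        pvAt maps p.1 p.2 ≠ tgt := by
  obtain ⟨a, b⟩ := c
  rw [pvFound_eq_flat, List.mem_flatMap]
  constructor
  · rintro ⟨i, hi, hm⟩
    rw [List.mem_map] at hm
    obtain ⟨j, hj, heq⟩ := hm
    rw [List.mem_filter] at hj
    obtain ⟨hjr, hcond⟩ := hj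
    rw [PySem.List.mem_pyRange_one] at hi hjr
    simp only [decide_eq_true_eq] at hcond
    obtain ⟨h1, h2, h3⟩ := hcond
    cases heq
    refine ⟨⟨hi.1, hi.2, hjr.1, hjr.2⟩, h1, h2, ?_⟩
    rw [List.any_eq_true] at h3
    obtain ⟨p, hp, hpc⟩ := h3
    simp only [decide_eq_true_eq] at hpc
    exact ⟨p, hp, hpc.1, hpc.2.1, hpc.2.2⟩
  · rintro ⟨⟨ha0, ha1, hb0, hb1⟩, h1, h2, p, hp, hpin, hpc, hpt⟩
    refine ⟨a, ?_, ?_⟩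
    · rw [PySem.List.mem_pyRange_one]; exact ⟨ha0, ha1⟩
    · rw [List.mem_map]
      refine ⟨b, ?_, rfl⟩
      rw [List.mem_filter, PySem.List.mem_pyRange_one]
      refine ⟨⟨hb0, hb1⟩, ?_⟩
      simp only [decide_eq_true_eq]
      refine ⟨h1, h2, ?_⟩
      rw [List.any_eq_true]
      exact ⟨p, hp, by simp only [decide_eq_true_eq]; exact ⟨hpin, hpc, hpt⟩⟩

lemma pvNodup_found (maps : List String) (tgt : Char) (dist : PySem.Dict (Int × Int) Int) :
    (pvFound maps tgt dist).Nodup := by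
  rw [pvFound_eq_flat, List.nodup_flatMap]
  constructor
  · intro i _
    have hinj : Function.Injective (fun (j : Int) => ((i : Int), j)) := by
      intro x y hxy
      simpa using hxy
    exact List.Nodup.map hinj ((PySem.List.nodup_pyRange_one _ _).filter _)
  · refine (PySem.List.pairwise_lt_pyRange_one _ _).imp ?_
    intro a b hab x hx hx'
    simp only [List.mem_map, List.mem_filter] at hx hx'
    obtain ⟨j, _, rfl⟩ := hx
    obtain ⟨j', _, he⟩ := hx'
    have : b = a := (Prod.mk.injEq .. ▸ he).1
    omega

-- contains after the update loop
lemma pvContains_update (dist : PySem.Dict (Int × Int) Int) (found : List (Int × Int)) (r : Int)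
    (c : Int × Int) :
    ((found.foldl (fun d c => d.insert c r) dist).contains c = true) ↔
      dist.contains c = true ∨ c ∈ found := by
  have hk := PySem.Dict.keys_foldl_insert found (fun _ _ => r) dist
  rw [PySem.Dict.contains_iff_mem_keys, hk, PySem.Set.mem_update,
    ← PySem.Dict.contains_iff_mem_keys]

-- items after the update loop (fresh distinct keys append)
lemma pvItems_update (dist : PySem.Dict (Int × Int) Int) (found : List (Int × Int)) (r : Int)
    (hfresh : ∀ a ∈ found, dist.contains a = false) (hnd : found.Nodup) :
    (found.foldl (fun d c => d.insert c r) dist).items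
      = dist.items ++ found.map (fun a => (a, r)) := by
  have := PySem.Dict.items_foldl_insert_fresh (k := fun a => a) (v := fun _ => r)
    (l := found) (d := dist) (by simpa using hfresh) (by simpa using hnd)
  simpa using this

lemma pvHits_update (maps : List String) (tgt : Char) (dist : PySem.Dict (Int × Int) Int)
    (found : List (Int × Int)) (r : Int)
    (hfresh : ∀ a ∈ found, dist.contains a = false) (hnd : found.Nodup) :
    pvHits maps tgt (found.foldl (fun d c => d.insert c r) dist)
      = pvHits maps tgt dist
        ++ (found.filter (fun c => decide (pvAt maps c.1 c.2 = tgt))).map (fun _ => r) := by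
  unfold pvHits
  rw [pvItems_update dist found r hfresh hnd, List.filter_append, List.map_append]
  congr 1
  rw [List.filter_map, List.map_map]
  congr 1

lemma pvGet?_update_le (dist : PySem.Dict (Int × Int) Int) (found : List (Int × Int)) (r : Int)
    (hfresh : ∀ a ∈ found, dist.contains a = false) (hnd : found.Nodup)
    (hk : dist.keys.Nodup) (c : Int × Int) (v : Int)
    (h : (found.foldl (fun d c => d.insert c r) dist).get? c = some v) :
    dist.get? c = some v ∨ v = r := by
  have hk' : (found.foldl (fun d c => d.insert c r) dist).keys.Nodup :=
    PySem.Dict.nodup_keys_foldl_insert found (fun _ _ => r) dist hk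
  have hmem := (PySem.Dict.get?_eq_some_iff_mem_items _ c v hk').mp h
  rw [pvItems_update dist found r hfresh hnd, List.mem_append] at hmem
  rcases hmem with hm | hm
  · exact Or.inl (PySem.Dict.get?_of_mem_items dist hm hk)
  · right
    rw [List.mem_map] at hm
    obtain ⟨a, _, he⟩ := hm
    exact (Prod.ext_iff.mp he.symm).2

lemma pvHits_nil (maps : List String) (tgt : Char) (dist : PySem.Dict (Int × Int) Int)
    (h : ∀ c : Int × Int, dist.contains c = true → pvAt maps c.1 c.2 ≠ tgt) :
    pvHits maps tgt dist = [] := by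
  unfold pvHits
  rw [List.filter_eq_nil_iff.mpr, List.map_nil]
  intro it hit
  simp only [decide_eq_true_eq]
  have hc : dist.contains it.1 = true := by
    rw [PySem.Dict.contains_iff_mem_keys]
    exact PySem.Dict.mem_keys_of_mem_items dist hit
  exact h it.1 hc

lemma pvMem_hits (maps : List String) (tgt : Char) (dist : PySem.Dict (Int × Int) Int)
    (hk : dist.keys.Nodup) (m : Int) (h : m ∈ pvHits maps tgt dist) :
    ∃ c, dist.get? c = some m := by
  unfold pvHits at h
  rw [List.mem_map] at h
  obtain ⟨it, hit, rfl⟩ := h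
  rw [List.mem_filter] at hit
  refine ⟨it.1, PySem.Dict.get?_of_mem_items dist ?_ hk⟩
  exact (by simpa using hit.1 : (it.1, it.2) ∈ dist.items)

lemma pvFoldl_min_eq : ∀ (l : List Int) (a : Int), (∀ x ∈ l, a ≤ x) → l.foldl min a = a := by
  intro l
  induction l with
  | nil => intro a _; rfl
  | cons x t ih =>
    intro a h
    have hax : a ≤ x := h x (by simp)
    rw [List.foldl_cons, min_eq_left hax]
    exact ih a (fun y hy => h y (by simp [hy]))

lemma pvMin_append (h1 h2 : List Int) (m : Int)
    (hm : PySem.List.min? h1 (fun v => v) = some m) (hall : ∀ x ∈ h2, m ≤ x) :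
    PySem.List.min? (h1 ++ h2) (fun v => v) = some m := by
  cases h1 with
  | nil =>
    rw [show (PySem.List.min? ([] : List Int) (fun v => v)) = none from rfl] at hm
    cases hm
  | cons y t =>
    rw [PySem.List.min?_id_cons] at hm
    have hm' : t.foldl min y = m := by injection hm
    rw [List.cons_append, PySem.List.min?_id_cons, List.foldl_append, hm']
    rw [pvFoldl_min_eq h2 m hall]

lemma pvMin_all (l : List Int) (r : Int) (hne : l ≠ []) (hall : ∀ x ∈ l, x = r) :
    PySem.List.min? l (fun v => v) = some r := by
  cases l with
  | nil => exact absurd rfl hne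
  | cons y t =>
    have hy : y = r := hall y (by simp)
    rw [PySem.List.min?_id_cons, hy, pvFoldl_min_eq t r (fun x hx => le_of_eq (hall x (by simp [hx])).symm)]

-- the min over target discovery rounds is unchanged by later rounds
lemma pvJacobiMin (maps : List String) (tgt : Char) :
    ∀ (fJ : Nat) (r : Int) (dist : PySem.Dict (Int × Int) Int),
    dist.keys.Nodup →
    (∀ (c : Int × Int) (v : Int), dist.get? c = some v → v < r) →
    ∀ m, PySem.List.min? (pvHits maps tgt dist) (fun v => v) = some m →
    PySem.List.min? (pvHits maps tgt (pvJacobi maps tgt fJ r dist)) (fun v => v) = some m := by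
  intro fJ
  induction fJ with
  | zero => intro r dist hk hv m hm; simpa [pvJacobi] using hm
  | succ f ih =>
    intro r dist hk hv m hm
    simp only [pvJacobi]
    by_cases hfe : pvFound maps tgt dist = []
    · rw [if_pos hfe]; exact hm
    · rw [if_neg hfe]
      have hfresh : ∀ a ∈ pvFound maps tgt dist, dist.contains a = false :=
        fun a ha => ((pvMem_found maps tgt dist a).mp ha).2.2.1
      have hnd := pvNodup_found maps tgt dist
      have hmr : m < r := by
        have hmm : m ∈ pvHits maps tgt dist := PySem.List.min?_mem hm
        obtain ⟨c, hc⟩ := pvMem_hits maps tgt dist hk m hmm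
        exact hv c m hc
      have hm' : PySem.List.min?
          (pvHits maps tgt ((pvFound maps tgt dist).foldl (fun d c => d.insert c r) dist))
          (fun v => v) = some m := by
        rw [pvHits_update maps tgt dist _ r hfresh hnd]
        apply pvMin_append _ _ _ hm
        intro x hx
        rw [List.mem_map] at hx
        obtain ⟨a, -, rfl⟩ := hx
        omega
      refine ih (r + 1) _ ?_ ?_ m hm'
      · exact PySem.Dict.nodup_keys_foldl_insert _ (fun _ _ => r) dist hk
      · intro c v hg
        rcases pvGet?_update_le dist _ r hfresh hnd hk c v hg with h | h
        · have := hv c v h; omega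
        · omega

-- target never in the frontier/visited set during the running phase
lemma pvDirsB_hit (maps : List String) (tgt : Char) (x y : Int) :
    ∀ (ds : List (Int × Int)) (nxt : List (Int × Int)) (vis : PySem.Set (Int × Int)),
    (∀ p : Int × Int, pvAt maps p.1 p.2 = tgt → p ∉ vis) →
    (∃ d ∈ ds, pvInB maps (x + d.1) (y + d.2) ∧ pvAt maps (x + d.1) (y + d.2) = tgt) →
    pvDirsB maps tgt x y ds nxt vis = Sum.inl () := by
  intro ds
  induction ds with
  | nil => intro nxt vis _ hex; simp at hex
  | cons d ds ih =>
    intro nxt vis hvnt hex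
    simp only [pvDirsB]
    by_cases hd : pvInB maps (x + d.1) (y + d.2) ∧ pvAt maps (x + d.1) (y + d.2) = tgt
    · have hnv : (x + d.1, y + d.2) ∉ vis := hvnt _ hd.2
      have hinb : 0 ≤ x + d.1 ∧ x + d.1 < (maps.length : Int) ∧ 0 ≤ y + d.2 ∧
          y + d.2 < pvRowLen maps (x + d.1) := hd.1
      rw [if_pos ⟨hinb, hnv⟩, if_pos hd.2]
    · have hex' : ∃ d' ∈ ds, pvInB maps (x + d'.1) (y + d'.2) ∧
          pvAt maps (x + d'.1) (y + d'.2) = tgt := by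
        obtain ⟨d', hd', hprop⟩ := hex
        rcases List.mem_cons.mp hd' with rfl | hmem
        · exact absurd hprop hd
        · exact ⟨d', hmem, hprop⟩
      by_cases hc : (0 ≤ x + d.1 ∧ x + d.1 < (maps.length : Int) ∧ 0 ≤ y + d.2 ∧
          y + d.2 < pvRowLen maps (x + d.1)) ∧ (x + d.1, y + d.2) ∉ vis
      · rw [if_pos hc]
        by_cases ht : pvAt maps (x + d.1) (y + d.2) = tgt
        · rw [if_pos ht]
        · rw [if_neg ht]
          by_cases hs : pvAt maps (x + d.1) (y + d.2) ∈ "SOLE".toList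
          · rw [if_pos hs]
            refine ih _ _ ?_ hex'
            intro p hp hmem
            rcases (PySem.Set.mem_add _ _ _).mp hmem with h | h
            · exact hvnt p hp h
            · subst h; exact ht hp
          · rw [if_neg hs]
            exact ih _ _ hvnt hex'
      · rw [if_neg hc]
        exact ih _ _ hvnt hex'

lemma pvDirsB_nohit (maps : List String) (tgt : Char) (x y : Int) :
    ∀ (ds : List (Int × Int)) (nxt : List (Int × Int)) (vis : PySem.Set (Int × Int)),
    (∀ p : Int × Int, pvAt maps p.1 p.2 = tgt → p ∉ vis) →
    (∀ p ∈ nxt, p ∈ vis) → nxt.Nodup →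
    (¬ ∃ d ∈ ds, pvInB maps (x + d.1) (y + d.2) ∧ pvAt maps (x + d.1) (y + d.2) = tgt) →
    ∃ nxt' vis', pvDirsB maps tgt x y ds nxt vis = Sum.inr (nxt', vis') ∧
      (∀ p : Int × Int, p ∈ nxt' ↔ p ∈ nxt ∨ (∃ d ∈ ds, p = (x + d.1, y + d.2) ∧
        pvInB maps p.1 p.2 ∧ pvAt maps p.1 p.2 ∈ "SOLE".toList ∧ pvAt maps p.1 p.2 ≠ tgt ∧
        p ∉ vis)) ∧
      (∀ p : Int × Int, p ∈ vis' ↔ p ∈ vis ∨ p ∈ nxt') ∧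
      (∀ p ∈ nxt', p ∈ vis') ∧ nxt'.Nodup ∧
      (∃ k, nxt'.length = nxt.length + k ∧ pvCnt maps vis' = pvCnt maps vis + k) := by
  intro ds
  induction ds with
  | nil =>
    intro nxt vis hvnt hnx hnd _
    refine ⟨nxt, vis, rfl, fun p => by simp, fun p => ⟨Or.inl, fun h => h.elim id (hnx p)⟩,
      hnx, hnd, 0, rfl, rfl⟩
  | cons d ds ih =>
    intro nxt vis hvnt hnx hnd hno
    have hnohead : ¬ (pvInB maps (x + d.1) (y + d.2) ∧ pvAt maps (x + d.1) (y + d.2) = tgt) :=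
      fun h => hno ⟨d, by simp, h⟩
    have hnotail : ¬ ∃ d' ∈ ds, pvInB maps (x + d'.1) (y + d'.2) ∧
        pvAt maps (x + d'.1) (y + d'.2) = tgt := by
      rintro ⟨d', h1, h2⟩
      exact hno ⟨d', by simp [h1], h2⟩
    simp only [pvDirsB]
    by_cases hc : (0 ≤ x + d.1 ∧ x + d.1 < (maps.length : Int) ∧ 0 ≤ y + d.2 ∧
        y + d.2 < pvRowLen maps (x + d.1)) ∧ (x + d.1, y + d.2) ∉ vis
    · have ht : ¬ pvAt maps (x + d.1) (y + d.2) = tgt := fun h => hnohead ⟨hc.1, h⟩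
      rw [if_pos hc, if_neg ht]
      by_cases hs : pvAt maps (x + d.1) (y + d.2) ∈ "SOLE".toList
      · rw [if_pos hs]
        have hqvis : (x + d.1, y + d.2) ∉ nxt := fun h => hc.2 (hnx _ h)
        have hvnt' : ∀ p : Int × Int, pvAt maps p.1 p.2 = tgt → p ∉ vis.add (x + d.1, y + d.2) := by
          intro p hp hmem
          rcases (PySem.Set.mem_add _ _ _).mp hmem with h | h
          · exact hvnt p hp h
          · subst h; exact ht hp
        have hnx' : ∀ p ∈ nxt ++ [(x + d.1, y + d.2)], p ∈ vis.add (x + d.1, y + d.2) := by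
          intro p hp
          rcases List.mem_append.mp hp with h | h
          · exact (PySem.Set.mem_add _ _ _).mpr (Or.inl (hnx p h))
          · exact (PySem.Set.mem_add _ _ _).mpr (Or.inr (by simpa using h))
        have hnd' : (nxt ++ [(x + d.1, y + d.2)]).Nodup := by
          rw [List.nodup_append]
          exact ⟨hnd, List.nodup_singleton _, by
            intro a ha b hb
            rw [List.mem_singleton] at hb
            subst hb
            rintro rfl
            exact hqvis ha⟩
        obtain ⟨nxt', vis', heq, hmemN, hmemV, hsub, hnd2, k, hk1, hk2⟩ :=
          ih (nxt ++ [(x + d.1, y + d.2)]) (vis.add (x + d.1, y + d.2)) hvnt' hnx' hnd' hnotail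
        refine ⟨nxt', vis', heq, ?_, ?_, hsub, hnd2, k + 1, ?_, ?_⟩
        · intro p
          rw [hmemN p]
          constructor
          · rintro (hp | ⟨d', hd', hpe, hpin, hps, hpt, hpv⟩)
            · rcases List.mem_append.mp hp with h | h
              · exact Or.inl h
              · right
                refine ⟨d, by simp, by simpa using h, ?_, ?_, ?_, ?_⟩ <;>
                  rw [show p = (x + d.1, y + d.2) from by simpa using h]
                · exact hc.1
                · exact hs
                · exact ht
                · exact hc.2
            · right
              refine ⟨d', by simp [hd'], hpe, hpin, hps, hpt, ?_⟩
              intro hm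
              exact hpv ((PySem.Set.mem_add _ _ _).mpr (Or.inl hm))
          · rintro (hp | ⟨d', hd', hpe, hpin, hps, hpt, hpv⟩)
            · exact Or.inl (List.mem_append.mpr (Or.inl hp))
            · rcases List.mem_cons.mp hd' with rfl | hmem
              · exact Or.inl (List.mem_append.mpr (Or.inr (by simp [hpe])))
              · by_cases hpq : p = (x + d.1, y + d.2)
                · exact Or.inl (List.mem_append.mpr (Or.inr (by simp [hpq])))
                · right
                  refine ⟨d', hmem, hpe, hpin, hps, hpt, ?_⟩
                  intro hm
                  rcases (PySem.Set.mem_add _ _ _).mp hm with h | h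
                  · exact hpv h
                  · exact hpq h
        · intro p
          rw [hmemV p]
          constructor
          · rintro (hp | hp)
            · rcases (PySem.Set.mem_add _ _ _).mp hp with h | h
              · exact Or.inl h
              · right
                rw [hmemN p]
                exact Or.inl (List.mem_append.mpr (Or.inr (by simp [h])))
            · exact Or.inr hp
          · rintro (hp | hp)
            · exact Or.inl ((PySem.Set.mem_add _ _ _).mpr (Or.inl hp))
            · exact Or.inr hp
        · rw [hk1]; simp; omega
        · rw [hk2, pvCnt_add maps vis (x + d.1, y + d.2) hc.1 hc.2]; omega
      · rw [if_neg hs]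
        obtain ⟨nxt', vis', heq, hmemN, hmemV, hsub, hnd2, hk⟩ :=
          ih nxt vis hvnt hnx hnd hnotail
        refine ⟨nxt', vis', heq, ?_, hmemV, hsub, hnd2, hk⟩
        intro p
        rw [hmemN p]
        constructor
        · rintro (hp | ⟨d', hd', rest⟩)
          · exact Or.inl hp
          · exact Or.inr ⟨d', by simp [hd'], rest⟩
        · rintro (hp | ⟨d', hd', hpe, hpin, hps, hpt, hpv⟩)
          · exact Or.inl hp
          · rcases List.mem_cons.mp hd' with rfl | hmem
            · rw [hpe] at hps
              exact absurd hps hs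
            · exact Or.inr ⟨d', hmem, hpe, hpin, hps, hpt, hpv⟩
    · rw [if_neg hc]
      obtain ⟨nxt', vis', heq, hmemN, hmemV, hsub, hnd2, hk⟩ :=
        ih nxt vis hvnt hnx hnd hnotail
      refine ⟨nxt', vis', heq, ?_, hmemV, hsub, hnd2, hk⟩
      intro p
      rw [hmemN p]
      constructor
      · rintro (hp | ⟨d', hd', rest⟩)
        · exact Or.inl hp
        · exact Or.inr ⟨d', by simp [hd'], rest⟩
      · rintro (hp | ⟨d', hd', hpe, hpin, hps, hpt, hpv⟩)
        · exact Or.inl hp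
        · rcases List.mem_cons.mp hd' with rfl | hmem
          · subst hpe
            exact absurd ⟨hpin, hpv⟩ hc
          · exact Or.inr ⟨d', hmem, hpe, hpin, hps, hpt, hpv⟩

lemma pvLevelB_hit (maps : List String) (tgt : Char) :
    ∀ (cs : List (Int × Int)) (nxt : List (Int × Int)) (vis : PySem.Set (Int × Int)),
    (∀ p : Int × Int, pvAt maps p.1 p.2 = tgt → p ∉ vis) →
    (∀ p ∈ nxt, p ∈ vis) → nxt.Nodup →
    (∃ c ∈ cs, ∃ p ∈ pvNbrs c.1 c.2, pvInB maps p.1 p.2 ∧ pvAt maps p.1 p.2 = tgt) →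
    pvLevelB maps tgt cs nxt vis = Sum.inl () := by
  intro cs
  induction cs with
  | nil => intro nxt vis _ _ _ hex; simp at hex
  | cons c cs ih =>
    intro nxt vis hvnt hnx hnd hex
    simp only [pvLevelB]
    by_cases hch : ∃ p ∈ pvNbrs c.1 c.2, pvInB maps p.1 p.2 ∧ pvAt maps p.1 p.2 = tgt
    · have hex2 : ∃ d ∈ ([(-1, 0), (1, 0), (0, -1), (0, 1)] : List (Int × Int)),
          pvInB maps (c.1 + d.1) (c.2 + d.2) ∧ pvAt maps (c.1 + d.1) (c.2 + d.2) = tgt := by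
        obtain ⟨p, hp, h1, h2⟩ := hch
        obtain ⟨a, b⟩ := p
        rw [pvNbrs_iff] at hp
        obtain ⟨d, hd, hpe⟩ := hp
        have he1 : a = c.1 + d.1 := (Prod.ext_iff.mp hpe).1
        have he2 : b = c.2 + d.2 := (Prod.ext_iff.mp hpe).2
        refine ⟨d, hd, ?_, ?_⟩
        · rw [← he1, ← he2]; exact h1
        · rw [← he1, ← he2]; exact h2
      rw [pvDirsB_hit maps tgt c.1 c.2 _ nxt vis hvnt hex2]
    · have hnohit_c : ¬ ∃ d ∈ ([(-1, 0), (1, 0), (0, -1), (0, 1)] : List (Int × Int)),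
          pvInB maps (c.1 + d.1) (c.2 + d.2) ∧ pvAt maps (c.1 + d.1) (c.2 + d.2) = tgt := by
        rintro ⟨d, hd, h1, h2⟩
        exact hch ⟨(c.1 + d.1, c.2 + d.2), (pvNbrs_iff c.1 c.2 _ _).mpr ⟨d, hd, rfl⟩, h1, h2⟩
      obtain ⟨nxt', vis', heq, hmemN, hmemV, hsub, hnd2, hk⟩ :=
        pvDirsB_nohit maps tgt c.1 c.2 _ nxt vis hvnt hnx hnd hnohit_c
      rw [heq]
      have hvnt' : ∀ p : Int × Int, pvAt maps p.1 p.2 = tgt → p ∉ vis' := by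
        intro p hp hm
        rcases (hmemV p).mp hm with h | h
        · exact hvnt p hp h
        · rcases (hmemN p).mp h with h2 | ⟨d', hd', hpe, hpin, hps, hpt, hpv⟩
          · exact hvnt p hp (hnx p h2)
          · exact hpt hp
      have hex' : ∃ c' ∈ cs, ∃ p ∈ pvNbrs c'.1 c'.2, pvInB maps p.1 p.2 ∧
          pvAt maps p.1 p.2 = tgt := by
        obtain ⟨c', hc', hrest⟩ := hex
        rcases List.mem_cons.mp hc' with rfl | hmem
        · exact absurd hrest hch
        · exact ⟨c', hmem, hrest⟩
      exact ih nxt' vis' hvnt' hsub hnd2 hex'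

lemma pvLevelB_nohit (maps : List String) (tgt : Char) :
    ∀ (cs : List (Int × Int)) (nxt : List (Int × Int)) (vis : PySem.Set (Int × Int)),
    (∀ p : Int × Int, pvAt maps p.1 p.2 = tgt → p ∉ vis) →
    (∀ p ∈ nxt, p ∈ vis) → nxt.Nodup →
    (¬ ∃ c ∈ cs, ∃ p ∈ pvNbrs c.1 c.2, pvInB maps p.1 p.2 ∧ pvAt maps p.1 p.2 = tgt) →
    ∃ nxt' vis', pvLevelB maps tgt cs nxt vis = Sum.inr (nxt', vis') ∧
      (∀ p : Int × Int, p ∈ nxt' ↔ p ∈ nxt ∨ (∃ c ∈ cs, p ∈ pvNbrs c.1 c.2 ∧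
        pvInB maps p.1 p.2 ∧ pvAt maps p.1 p.2 ∈ "SOLE".toList ∧ pvAt maps p.1 p.2 ≠ tgt ∧
        p ∉ vis)) ∧
      (∀ p : Int × Int, p ∈ vis' ↔ p ∈ vis ∨ p ∈ nxt') ∧
      (∀ p ∈ nxt', p ∈ vis') ∧ nxt'.Nodup ∧
      (∃ k, nxt'.length = nxt.length + k ∧ pvCnt maps vis' = pvCnt maps vis + k) := by
  intro cs
  induction cs with
  | nil =>
    intro nxt vis hvnt hnx hnd _
    refine ⟨nxt, vis, rfl, fun p => by simp, fun p => ⟨Or.inl, fun h => h.elim id (hnx p)⟩,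
      hnx, hnd, 0, rfl, rfl⟩
  | cons c cs ih =>
    intro nxt vis hvnt hnx hnd hno
    have hch : ¬ ∃ p ∈ pvNbrs c.1 c.2, pvInB maps p.1 p.2 ∧ pvAt maps p.1 p.2 = tgt := by
      rintro ⟨p, hp, h1, h2⟩
      exact hno ⟨c, by simp, p, hp, h1, h2⟩
    have hnotail : ¬ ∃ c' ∈ cs, ∃ p ∈ pvNbrs c'.1 c'.2, pvInB maps p.1 p.2 ∧
        pvAt maps p.1 p.2 = tgt := by
      rintro ⟨c', h1, h2⟩
      exact hno ⟨c', by simp [h1], h2⟩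
    have hnohit_c : ¬ ∃ d ∈ ([(-1, 0), (1, 0), (0, -1), (0, 1)] : List (Int × Int)),
        pvInB maps (c.1 + d.1) (c.2 + d.2) ∧ pvAt maps (c.1 + d.1) (c.2 + d.2) = tgt := by
      rintro ⟨d, hd, h1, h2⟩
      exact hch ⟨(c.1 + d.1, c.2 + d.2), (pvNbrs_iff c.1 c.2 _ _).mpr ⟨d, hd, rfl⟩, h1, h2⟩
    obtain ⟨nxt1, vis1, heq1, hmemN1, hmemV1, hsub1, hnd1, k1, hl1, hc1⟩ :=
      pvDirsB_nohit maps tgt c.1 c.2 _ nxt vis hvnt hnx hnd hnohit_c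
    simp only [pvLevelB, heq1]
    have hvnt1 : ∀ p : Int × Int, pvAt maps p.1 p.2 = tgt → p ∉ vis1 := by
      intro p hp hm
      rcases (hmemV1 p).mp hm with h | h
      · exact hvnt p hp h
      · rcases (hmemN1 p).mp h with h2 | ⟨d', hd', hpe, hpin, hps, hpt, hpv⟩
        · exact hvnt p hp (hnx p h2)
        · exact hpt hp
    obtain ⟨nxt', vis', heq, hmemN, hmemV, hsub, hnd2, k2, hl2, hc2⟩ :=
      ih nxt1 vis1 hvnt1 hsub1 hnd1 hnotail
    have hsubvis : ∀ p ∈ vis, p ∈ vis1 := fun p hp => (hmemV1 p).mpr (Or.inl hp)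
    have hnxt1sub : ∀ p ∈ nxt1, p ∈ nxt' := fun p hp => (hmemN p).mpr (Or.inl hp)
    refine ⟨nxt', vis', heq, ?_, ?_, hsub, hnd2, k1 + k2, by omega, by omega⟩
    · intro p
      rw [hmemN p]
      constructor
      · rintro (hp | ⟨c', hc', hpn, hpin, hps, hpt, hpv⟩)
        · rcases (hmemN1 p).mp hp with h | ⟨d', hd', hpe, hpin, hps, hpt, hpv⟩
          · exact Or.inl h
          · right
            exact ⟨c, by simp, by rw [hpe]; exact (pvNbrs_iff c.1 c.2 _ _).mpr ⟨d', hd', rfl⟩,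
              hpin, hps, hpt, hpv⟩
        · right
          refine ⟨c', by simp [hc'], hpn, hpin, hps, hpt, fun hm => hpv (hsubvis p hm)⟩
      · rintro (hp | ⟨c', hc', hpn, hpin, hps, hpt, hpv⟩)
        · exact Or.inl ((hmemN1 p).mpr (Or.inl hp))
        · by_cases hp1 : p ∈ vis1
          · rcases (hmemV1 p).mp hp1 with h | h
            · exact absurd h hpv
            · exact Or.inl h
          · rcases List.mem_cons.mp hc' with rfl | hmem
            · left
              apply (hmemN1 p).mpr
              right
              obtain ⟨a, b⟩ := p
              rw [pvNbrs_iff] at hpn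
              obtain ⟨d, hd, hpe⟩ := hpn
              exact ⟨d, hd, hpe, hpin, hps, hpt, hpv⟩
            · exact Or.inr ⟨c', hmem, hpn, hpin, hps, hpt, hp1⟩
    · intro p
      rw [hmemV p]
      constructor
      · rintro (hp | hp)
        · rcases (hmemV1 p).mp hp with h | h
          · exact Or.inl h
          · exact Or.inr (hnxt1sub p h)
        · exact Or.inr hp
      · rintro (hp | hp)
        · exact Or.inl (hsubvis p hp)
        · exact Or.inr hp

-- MAIN: the early-return flood equals the fixed-point table read, level by round
lemma pvMainB (maps : List String) (tgt : Char) (htgt : tgt ∈ "SOLE".toList) :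
    ∀ (fJ : Nat) (cur : List (Int × Int)) (t : Int) (vis : PySem.Set (Int × Int))
      (dist : PySem.Dict (Int × Int) Int) (fF : Nat),
    (∀ c : Int × Int, dist.contains c = true ↔ c ∈ vis) →
    (∀ c ∈ vis, pvInB maps c.1 c.2 ∧ pvAt maps c.1 c.2 ∈ "SOLE".toList ∧ pvAt maps c.1 c.2 ≠ tgt) →
    (∀ (c : Int × Int) (v : Int), dist.get? c = some v → v ≤ t) →
    dist.keys.Nodup →
    (∀ c ∈ cur, c ∈ vis) →
    (∀ c ∈ vis, c ∉ cur → ∀ p ∈ pvNbrs c.1 c.2, pvInB maps p.1 p.2 →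
       pvAt maps p.1 p.2 ∈ "SOLE".toList → p ∈ vis) →
    fF ≥ (pvCells maps).length - pvCnt maps vis + 1 →
    fJ ≥ (pvCells maps).length - pvCnt maps vis + 1 →
    pvFloodLoopB maps tgt fF cur t vis
      = (match PySem.List.min? (pvHits maps tgt (pvJacobi maps tgt fJ (t + 1) dist)) (fun v => v) with
         | some m => m
         | none => -1)
    ∧ (∀ m, PySem.List.min? (pvHits maps tgt (pvJacobi maps tgt fJ (t + 1) dist)) (fun v => v) = some m
        → t + 1 ≤ m) := by
  intro fJ
  induction fJ with
  | zero =>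
    intro cur t vis dist fF h1 h2 h3 h4 h5 h6 hfF hfJ
    exact absurd hfJ (by omega)
  | succ fJ' ih =>
    intro cur t vis dist fF h1 h2 h3 h4 h5 h6 hfF hfJ
    have hclen : pvCnt maps vis ≤ (pvCells maps).length := by
      rw [pvLen_cells]; exact pvCnt_le maps vis
    have hhits0 : pvHits maps tgt dist = [] :=
      pvHits_nil maps tgt dist (fun c hc => ((h2 c ((h1 c).mp hc)).2.2))
    have hvnt : ∀ p : Int × Int, pvAt maps p.1 p.2 = tgt → p ∉ vis :=
      fun p hp hm => (h2 p hm).2.2 hp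
    -- the round's found list versus the level's frontier, both ways, is used repeatedly
    by_cases hcur : cur = []
    · -- empty frontier: both sides report failure
      subst hcur
      have hfe : pvFound maps tgt dist = [] := by
        rw [List.eq_nil_iff_forall_not_mem]
        intro c hc
        obtain ⟨hcin, hcs, hcc, p, hpn, hpin, hpc, hpt⟩ := (pvMem_found maps tgt dist c).mp hc
        have hpv : p ∈ vis := (h1 p).mp hpc
        have : c ∈ vis := by
          refine h6 p hpv (by simp) c ?_ hcin hcs
          exact (pvNbrs_symm' _ _).mp hpn
        rw [← h1 c] at this
        rw [hcc] at this
        cases this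
      have hjac : pvJacobi maps tgt (fJ' + 1) (t + 1) dist = dist := by
        simp only [pvJacobi, hfe, if_pos]
      rw [hjac, hhits0]
      exact ⟨by rw [pvFloodLoopB_nil]; rfl, by intro m hm; cases hm⟩
    · obtain ⟨fF', rfl⟩ : ∃ f, fF = f + 1 := ⟨fF - 1, by omega⟩
      have hflood : pvFloodLoopB maps tgt (fF' + 1) cur t vis
          = match pvLevelB maps tgt cur [] vis with
            | Sum.inl _ => t + 1
            | Sum.inr r => pvFloodLoopB maps tgt fF' r.1 (t + 1) r.2 := by
        simp only [pvFloodLoopB, if_neg hcur]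
      by_cases hhit : ∃ c ∈ cur, ∃ p ∈ pvNbrs c.1 c.2, pvInB maps p.1 p.2 ∧ pvAt maps p.1 p.2 = tgt
      · -- the level hits the target: A-side returns t+1, B-side records t+1 as the first hit
        rw [hflood, pvLevelB_hit maps tgt cur [] vis hvnt (by simp) List.nodup_nil hhit]
        obtain ⟨c0, hc0, p0, hp0n, hp0in, hp0t⟩ := hhit
        have hp0f : p0 ∈ pvFound maps tgt dist := by
          rw [pvMem_found]
          have hc0v : c0 ∈ vis := h5 c0 hc0
          refine ⟨hp0in, by rw [hp0t]; exact htgt, ?_, c0, ?_, (h2 c0 hc0v).1,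
            (h1 c0).mpr hc0v, (h2 c0 hc0v).2.2⟩
          · cases hcc : dist.contains p0
            · rfl
            · exact absurd (hvnt p0 hp0t) (fun h => h ((h1 p0).mp hcc))
          · exact (pvNbrs_symm' _ _).mp hp0n
        have hfe : pvFound maps tgt dist ≠ [] := fun h => by rw [h] at hp0f; cases hp0f
        have hjac : pvJacobi maps tgt (fJ' + 1) (t + 1) dist
            = pvJacobi maps tgt fJ' (t + 2)
                ((pvFound maps tgt dist).foldl (fun d c => d.insert c (t + 1)) dist) := by
          simp only [pvJacobi, if_neg hfe]
          rw [show t + 1 + 1 = t + 2 by ring]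
        have hfresh : ∀ a ∈ pvFound maps tgt dist, dist.contains a = false :=
          fun a ha => ((pvMem_found maps tgt dist a).mp ha).2.2.1
        have hndf := pvNodup_found maps tgt dist
        have hmin1 : PySem.List.min?
            (pvHits maps tgt ((pvFound maps tgt dist).foldl (fun d c => d.insert c (t + 1)) dist))
            (fun v => v) = some (t + 1) := by
          rw [pvHits_update maps tgt dist _ (t + 1) hfresh hndf, hhits0, List.nil_append]
          apply pvMin_all
          · have : p0 ∈ (pvFound maps tgt dist).filter
                (fun c => decide (pvAt maps c.1 c.2 = tgt)) := by
              rw [List.mem_filter]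
              exact ⟨hp0f, by simp [hp0t]⟩
            intro hnil
            rw [List.map_eq_nil_iff] at hnil
            rw [hnil] at this
            cases this
          · intro x hx
            rw [List.mem_map] at hx
            obtain ⟨a, -, rfl⟩ := hx
            rfl
        have hk' := PySem.Dict.nodup_keys_foldl_insert (pvFound maps tgt dist)
          (fun _ _ => (t + 1)) dist h4
        have hv' : ∀ (c : Int × Int) (v : Int),
            ((pvFound maps tgt dist).foldl (fun d c => d.insert c (t + 1)) dist).get? c = some v →
            v < t + 2 := by
          intro c v hg
          rcases pvGet?_update_le dist _ (t + 1) hfresh hndf h4 c v hg with h | h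
          · have := h3 c v h; omega
          · omega
        have hfin := pvJacobiMin maps tgt fJ' (t + 2) _ hk' hv' (t + 1) hmin1
        rw [hjac, hfin]
        exact ⟨rfl, by intro m hm; injection hm with hh; omega⟩
      · -- no hit in this level: one more round on each side, re-synchronised
        obtain ⟨nxt', vis', heq, hmemN, hmemV, hsub, hnd2, k, hk1, hk2⟩ :=
          pvLevelB_nohit maps tgt cur [] vis hvnt (by simp) List.nodup_nil hhit
        rw [hflood, heq]
        -- found = nxt' as sets
        have hfoundmem : ∀ c : Int × Int, c ∈ pvFound maps tgt dist ↔ c ∈ nxt' := by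
          intro c
          rw [pvMem_found, hmemN c]
          constructor
          · rintro ⟨hcin, hcs, hcc, p, hpn, hpin, hpc, hpt⟩
            have hpv : p ∈ vis := (h1 p).mp hpc
            have hcnv : c ∉ vis := by
              intro hm
              rw [← h1 c] at hm
              rw [hcc] at hm
              cases hm
            have hpcur : p ∈ cur := by
              by_contra hpnc
              refine hcnv (h6 p hpv hpnc c ?_ hcin hcs)
              exact (pvNbrs_symm' _ _).mp hpn
            have hct : pvAt maps c.1 c.2 ≠ tgt := by
              intro hct
              refine hhit ⟨p, hpcur, c, ?_, hcin, hct⟩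
              exact (pvNbrs_symm' _ _).mp hpn
            right
            refine ⟨p, hpcur, ?_, hcin, hcs, hct, hcnv⟩
            exact (pvNbrs_symm' _ _).mp hpn
          · rintro (hp | ⟨c', hc', hpn, hpin, hps, hpt, hpv⟩)
            · cases hp
            · have hc'v : c' ∈ vis := h5 c' hc'
              refine ⟨hpin, hps, ?_, c', ?_, (h2 c' hc'v).1, (h1 c').mpr hc'v, (h2 c' hc'v).2.2⟩
              · cases hcc : dist.contains c
                · rfl
                · exact absurd ((h1 c).mp hcc) hpv
              · obtain ⟨a, b⟩ := c'
                obtain ⟨x, y⟩ := c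
                exact (pvNbrs_symm a b x y).mp hpn
        by_cases hfe : pvFound maps tgt dist = []
        · -- nothing new: both terminate with failure
          have hnxt : nxt' = [] := by
            rw [List.eq_nil_iff_forall_not_mem]
            intro p hp
            have := (hfoundmem p).mpr hp
            rw [hfe] at this
            cases this
          have hjac : pvJacobi maps tgt (fJ' + 1) (t + 1) dist = dist := by
            simp only [pvJacobi, hfe, if_pos]
          rw [hjac, hhits0, hnxt]
          refine ⟨?_, by intro m hm; cases hm⟩
          show pvFloodLoopB maps tgt fF' [] (t + 1) vis' = _
          rw [pvFloodLoopB_nil]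
          rfl
        · -- fresh cells found: recurse with the new frontier and the grown table
          have hnxtne : nxt' ≠ [] := by
            intro h
            obtain ⟨c, hc⟩ := List.exists_mem_of_ne_nil _ hfe
            have := (hfoundmem c).mp hc
            rw [h] at this
            cases this
          have hk1' : 1 ≤ k := by
            rcases nxt' with _ | ⟨a, l⟩
            · exact absurd rfl hnxtne
            · simp at hk1; omega
          have hjac : pvJacobi maps tgt (fJ' + 1) (t + 1) dist
              = pvJacobi maps tgt fJ' (t + 2)
                  ((pvFound maps tgt dist).foldl (fun d c => d.insert c (t + 1)) dist) := by
            simp only [pvJacobi, if_neg hfe]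
            rw [show t + 1 + 1 = t + 2 by ring]
          have hfresh : ∀ a ∈ pvFound maps tgt dist, dist.contains a = false :=
            fun a ha => ((pvMem_found maps tgt dist a).mp ha).2.2.1
          have hndf := pvNodup_found maps tgt dist
          set dist' := (pvFound maps tgt dist).foldl (fun d c => d.insert c (t + 1)) dist with hd'
          have hnewprops : ∀ p ∈ nxt', pvInB maps p.1 p.2 ∧
              pvAt maps p.1 p.2 ∈ "SOLE".toList ∧ pvAt maps p.1 p.2 ≠ tgt := by
            intro p hp
            rcases (hmemN p).mp hp with h | ⟨c', hc', hpn, hpin, hps, hpt, hpv⟩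
            · cases h
            · exact ⟨hpin, hps, hpt⟩
          have h1' : ∀ c : Int × Int, dist'.contains c = true ↔ c ∈ vis' := by
            intro c
            rw [hd', pvContains_update, hfoundmem c, hmemV c, h1 c]
          have h2' : ∀ c ∈ vis', pvInB maps c.1 c.2 ∧ pvAt maps c.1 c.2 ∈ "SOLE".toList ∧
              pvAt maps c.1 c.2 ≠ tgt := by
            intro c hc
            rcases (hmemV c).mp hc with h | h
            · exact h2 c h
            · exact hnewprops c h
          have h3' : ∀ (c : Int × Int) (v : Int), dist'.get? c = some v → v ≤ t + 1 := by
            intro c v hg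
            rcases pvGet?_update_le dist _ (t + 1) hfresh hndf h4 c v hg with h | h
            · have := h3 c v h; omega
            · omega
          have h4' := PySem.Dict.nodup_keys_foldl_insert (pvFound maps tgt dist)
            (fun _ _ => (t + 1)) dist h4
          have h6' : ∀ c ∈ vis', c ∉ nxt' → ∀ p ∈ pvNbrs c.1 c.2, pvInB maps p.1 p.2 →
              pvAt maps p.1 p.2 ∈ "SOLE".toList → p ∈ vis' := by
            intro c hc hcn p hpn hpin hps
            rcases (hmemV c).mp hc with hcv | hcv
            · by_cases hccur : c ∈ cur
              · -- a frontier cell: its passable neighbours are either old or freshly found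
                by_cases hpt : pvAt maps p.1 p.2 = tgt
                · exact absurd ⟨c, hccur, p, hpn, hpin, hpt⟩ hhit
                · by_cases hpv : p ∈ vis
                  · exact (hmemV p).mpr (Or.inl hpv)
                  · refine (hmemV p).mpr (Or.inr ((hmemN p).mpr (Or.inr
                      ⟨c, hccur, hpn, hpin, hps, hpt, hpv⟩)))
              · exact (hmemV p).mpr (Or.inl (h6 c hcv hccur p hpn hpin hps))
            · exact absurd hcv hcn
          have hcnt' : pvCnt maps vis' ≤ (pvCells maps).length := by
            rw [pvLen_cells]; exact pvCnt_le maps vis'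
          have IH := ih nxt' (t + 1) vis' dist' fF' h1' h2' h3' h4' hsub h6'
            (by omega) (by omega)
          obtain ⟨IH1, IH2⟩ := IH
          rw [hjac]
          constructor
          · show pvFloodLoopB maps tgt fF' nxt' (t + 1) vis' = _
            rw [IH1, show t + 1 + 1 = t + 2 by ring]
          · intro m hm
            have := IH2 m (by rw [show t + 1 + 1 = t + 2 by ring]; exact hm)
            omega

-- the full phase equivalence: A's bfs value = B's table read, for a valid start cell
lemma pvPhaseB (maps : List String) (s : Int × Int) (tgt : Char) (htgt : tgt ∈ "SOLE".toList)
    (hin : pvInB maps s.1 s.2) (hs : pvAt maps s.1 s.2 ∈ "SOLE".toList)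
    (hst : pvAt maps s.1 s.2 ≠ tgt) :
    pvFloodB maps s tgt
      = (match pvEscape maps s tgt with | some m => m | none => -1)
    ∧ (∀ m, pvEscape maps s tgt = some m → 1 ≤ m) := by
  have hcl : (pvCells maps).length = pvTotalLen maps := pvLen_cells maps
  have h1 : ∀ c : Int × Int, (PySem.Dict.empty.insert s 0).contains c = true ↔
      c ∈ PySem.Set.ofList [s] := by
    intro c
    rw [PySem.Dict.contains_insert]
    simp [PySem.Set.mem_ofList]
  have h2 : ∀ c ∈ PySem.Set.ofList [s], pvInB maps c.1 c.2 ∧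
      pvAt maps c.1 c.2 ∈ "SOLE".toList ∧ pvAt maps c.1 c.2 ≠ tgt := by
    intro c hc
    rw [PySem.Set.mem_ofList] at hc
    rw [List.mem_singleton] at hc
    subst hc
    exact ⟨hin, hs, hst⟩
  have h3 : ∀ (c : Int × Int) (v : Int), (PySem.Dict.empty.insert s 0).get? c = some v →
      v ≤ (0 : Int) := by
    intro c v hg
    rw [PySem.Dict.get?_insert] at hg
    split_ifs at hg
    · injection hg with h; omega
    · rw [PySem.Dict.get?_empty] at hg; cases hg
  have h4 : (PySem.Dict.empty.insert s 0).keys.Nodup :=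
    PySem.Dict.nodup_keys_insert _ _ _ PySem.Dict.nodup_keys_empty
  have h5 : ∀ c ∈ ([s] : List (Int × Int)), c ∈ PySem.Set.ofList [s] := by
    intro c hc
    rw [PySem.Set.mem_ofList]
    exact hc
  have h6 : ∀ c ∈ PySem.Set.ofList [s], c ∉ ([s] : List (Int × Int)) →
      ∀ p ∈ pvNbrs c.1 c.2, pvInB maps p.1 p.2 → pvAt maps p.1 p.2 ∈ "SOLE".toList →
      p ∈ PySem.Set.ofList [s] := by
    intro c hc hcn
    rw [PySem.Set.mem_ofList] at hc
    exact absurd hc hcn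
  have hb : pvTotalLen maps + 1 ≥ (pvCells maps).length - pvCnt maps (PySem.Set.ofList [s]) + 1 := by
    omega
  obtain ⟨hA, hB⟩ := pvMainB maps tgt htgt (pvTotalLen maps + 1) [s] 0 (PySem.Set.ofList [s])
    (PySem.Dict.empty.insert s 0) (pvTotalLen maps + 1) h1 h2 h3 h4 h5 h6 hb hb
  rw [show ((0 : Int) + 1) = 1 by ring] at hA hB
  constructor
  · rw [pvFloodB]
    rw [hA]
    rfl
  · intro m hm
    exact hB m hm

-- B's combined scan is the two last positions
def pvScanOne (maps : List String) (ch : Char) : Option (Int × Int) :=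
  (PySem.List.enumerate maps 0).foldl (fun acc p =>
    (PySem.List.enumerate p.2.toList 0).foldl (fun acc2 q =>
      if q.2 = ch then some (p.1, q.1) else acc2) acc) none

lemma pvScanOne_eq (maps : List String) (ch : Char) :
    pvScanOne maps ch = pvLastPos maps ch := by
  have h1 : pvScanOne maps ch = ((pvCand maps ch).map some).foldl (fun _ y => y) none := by
    rw [pvCand, List.map_flatMap, List.foldl_flatMap, pvScanOne]
    congr 1
    funext acc pr
    rw [pvFoldl_choose (fun (q : Int × Char) => q.2 = ch)
      (fun q => some ((pr.1, q.1) : Int × Int)) _ acc]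
    rw [List.map_map]
    rfl
  rw [h1, pvFoldl_last, List.getLast?_map, pvLastPos]
  cases (pvCand maps ch).getLast? <;> rfl

lemma pvScanB_eq (maps : List String) :
    pvScanB maps = (pvLastPos maps 'S', pvLastPos maps 'L') := by
  rw [← pvScanOne_eq maps 'S', ← pvScanOne_eq maps 'L']
  rw [pvScanB, pvScanOne, pvScanOne]
  rw [PySem.List.foldl_congr_mem _ _
    (fun acc p => ((PySem.List.enumerate p.2.toList 0).foldl
        (fun a (q : Int × Char) => if q.2 = 'S' then some ((p.1, q.1) : Int × Int) else a) acc.1,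
      (PySem.List.enumerate p.2.toList 0).foldl
        (fun a (q : Int × Char) => if q.2 = 'L' then some ((p.1, q.1) : Int × Int) else a) acc.2))
    (none, none) ?_]
  · exact PySem.List.foldl_prod_mk
      (fun a (p : Int × String) => (PySem.List.enumerate p.2.toList 0).foldl
        (fun a2 (q : Int × Char) => if q.2 = 'S' then some ((p.1, q.1) : Int × Int) else a2) a)
      (fun a (p : Int × String) => (PySem.List.enumerate p.2.toList 0).foldl
        (fun a2 (q : Int × Char) => if q.2 = 'L' then some ((p.1, q.1) : Int × Int) else a2) a)
      _ none none
  · intro acc p _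
    obtain ⟨a, b⟩ := acc
    exact PySem.List.foldl_prod_mk
      (fun a (q : Int × Char) => if q.2 = 'S' then some ((p.1, q.1) : Int × Int) else a)
      (fun a (q : Int × Char) => if q.2 = 'L' then some ((p.1, q.1) : Int × Int) else a) _ a b

-- ===== VERDICT (by name: the statement is the Claim_ definition above) =====
theorem solution_spec : Claim_equal_solution := by
  intro maps _ _
  unfold Spec_solution
  have hlever : (if ("lever" : String) = "lever" then false
      else if ("lever" : String) = "exit" then true else false) = false := by simp
  have hexit : (if ("exit" : String) = "lever" then false
      else if ("exit" : String) = "exit" then true else false) = true := by simp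
  simp only [solution, solution_alt, pvScanA_eq, pvScanB_eq]
  cases hS : pvLastPos maps 'S' with
  | none =>
    simp only [Option.getD_none]
    rw [pvBfsA_sentinel]
    simp
  | some sp =>
    obtain ⟨hinS, hatS⟩ := pvLastPos_some maps 'S' sp hS
    simp only [Option.getD_some]
    rw [pvPhase maps false sp hinS "lever" hlever]
    cases hL : pvLastPos maps 'L' with
    | none =>
      have habs := pvLastPos_none maps 'L' hL
      rw [show pvTgt false = 'L' from rfl]
      rw [pvFloodB, pvFlood_no_target maps 'L' habs]
      simp
    | some lp =>
      obtain ⟨hinL, hatL⟩ := pvLastPos_some maps 'L' lp hL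
      simp only [Option.getD_some]
      rw [show pvTgt false = 'L' from rfl]
      obtain ⟨hph1, hpos1⟩ := pvPhaseB maps sp 'L' (by decide) hinS
        (by rw [hatS]; decide) (by rw [hatS]; decide)
      rw [hph1]
      cases hE1 : pvEscape maps sp 'L' with
      | none => simp
      | some t1 =>
        have ht1 : 1 ≤ t1 := hpos1 t1 hE1
        simp only
        rw [if_neg (by omega : ¬ (t1 = -1))]
        rw [pvPhase maps true lp hinL "exit" hexit]
        rw [show pvTgt true = 'E' from rfl]
        obtain ⟨hph2, hpos2⟩ := pvPhaseB maps lp 'E' (by decide) hinL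
          (by rw [hatL]; decide) (by rw [hatL]; decide)
        rw [hph2]
        cases hE2 : pvEscape maps lp 'E' with
        | none => simp
        | some t2 =>
          have ht2 : 1 ≤ t2 := hpos2 t2 hE2
          simp only
          rw [if_neg (by omega : ¬ (t2 = -1))]
          omega
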